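-- pv_equiv track=rewrite | github.com/komaksym/biggitybiggityO | src/scraping/leetcode_solutions/solutions/gcd-sort-of-an-array.py | gcdSort
-- ===== SOURCE A (Python) =====
-- class UnionFind(object):  # Time: O(n * α(n)), Space: O(n)
--     def __init__(self, n):
--         self.set = list(range(n))
--         self.rank = [0]*n
--
--     def find_set(self, x):
--         stk = []
--         while self.set[x] != x:  # path compression
--             stk.append(x)
--             x = self.set[x]
--         while stk:
--             self.set[stk.pop()] = x
--         return x
--
--     def union_set(self, x, y):
--         x_root, y_root = list(map(self.find_set, (x, y)))
--         if x_root == y_root: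
--             return False
--         if self.rank[x_root] < self.rank[y_root]:  # union by rank
--             self.set[x_root] = y_root
--         elif self.rank[x_root] > self.rank[y_root]:
--             self.set[y_root] = x_root
--         else:
--             self.set[y_root] = x_root
--             self.rank[x_root] += 1
--         return True
--
-- def gcdSort(nums):
--     def modified_sieve_of_eratosthenes(n, lookup, uf):  # Time: O(n * log(logn)), Space: O(n)
--         if n < 2:
--             return
--         is_prime = [True]*(n+1)
--         for i in range(2, len(is_prime)):
--             if not is_prime[i]:
--                 continue
--             for j in range(i+i, len(is_prime), i):
--                 is_prime[j] = False
--                 if j in lookup:  # modified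
--                     uf.union_set(i-1, j-1)
--
--     max_num = max(nums)
--     uf = UnionFind(max_num)
--     modified_sieve_of_eratosthenes(max_num, set(nums), uf)
--     return all(uf.find_set(a-1) == uf.find_set(b-1) for a, b in zip(nums, sorted(nums)))
-- ===== SOURCE B (Python) =====
-- def gcdSort(nums):
--     max_num = max(nums)
--     parent = list(range(max_num))  # same node space as the sorting check: value v <-> slot v-1
--
--     def find(i):
--         while parent[i] != i:
--             i = parent[i]
--         return i
--
--     def union(i, j):
--         ri, rj = find(i), find(j)
--         if ri != rj:
--             parent[ri] = rj
--
--     for x in set(nums):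
--         if x < 2:
--             continue
--         v = x
--         d = 2
--         while d * d <= v:  # trial division: union x with each prime factor
--             if v % d == 0:
--                 union(x - 1, d - 1)
--                 while v % d == 0:
--                     v //= d
--             d += 1
--         if v > 1:
--             union(x - 1, v - 1)
--     return all(find(a - 1) == find(b - 1) for a, b in zip(nums, sorted(nums)))
-- ===== Notes on version B (the rewrite author's own statement) =====
-- stated objective: alternative
-- what changed: Replaces the Eratosthenes sieve over all multiples up to max(nums) and the union-find with rank and path compression by per-element trial-division factorization that unions each value with its distinct prime factors in a naive union-find over the same slots; Pre_ excludes exactly the inputs where A raises (empty list -> ValueError from max; an element below 1-max(nums) or max(nums) < 1 -> IndexError), on which B raises the same exceptions.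
import Mathlib
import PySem

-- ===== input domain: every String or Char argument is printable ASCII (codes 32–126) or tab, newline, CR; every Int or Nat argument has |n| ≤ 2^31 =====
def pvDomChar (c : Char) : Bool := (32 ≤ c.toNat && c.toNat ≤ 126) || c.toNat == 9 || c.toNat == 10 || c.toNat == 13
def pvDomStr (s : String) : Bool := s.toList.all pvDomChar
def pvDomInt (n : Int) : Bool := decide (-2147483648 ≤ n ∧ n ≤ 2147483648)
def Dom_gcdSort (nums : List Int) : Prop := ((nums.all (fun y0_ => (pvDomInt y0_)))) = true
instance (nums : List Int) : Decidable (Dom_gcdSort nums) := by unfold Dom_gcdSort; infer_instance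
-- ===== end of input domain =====

-- B replaces A's Eratosthenes sieve + rank/path-compression union-find over indices by
-- per-element trial-division factorization feeding a naive value-keyed union-find (alternative algorithm, similar cost).


-- ===== PORT A =====
-- Both ports keep the union-find state in an Array for O(1) reads/writes; pvAGet/pvASet are the
-- Python-exact list indexing primitives on it: s[i] / s[i]=v for -len(s) <= i < len(s) (negative
-- indices wrap, as in Python); out-of-range (IndexError in Python) is unreachable under Pre_.
def pvAGet {α : Type} (s : Array α) (i : Int) (d : α) : α :=
  if 0 ≤ i then s.getD i.toNat d else s.getD (s.size - (-i).toNat) d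

def pvASet {α : Type} (s : Array α) (i : Int) (v : α) : Array α :=
  if 0 ≤ i then s.setIfInBounds i.toNat v else s.setIfInBounds (s.size - (-i).toNat) v

-- UnionFind.find_set, first loop (path collection); fuel = array size never exhausts under Pre_
def findLoopA (s : Array Int) : Nat → Int → List Int → List Int × Int
  | 0, x, stk => (stk, x)
  | fuel+1, x, stk =>
    if pvAGet s x 0 ≠ x then
      findLoopA s fuel (pvAGet s x 0) (stk ++ [x])
    else (stk, x)

-- UnionFind.find_set: returns (root, mutated set-array); second loop writes the root over the stack
def findSetA (s : Array Int) (x : Int) : Int × Array Int :=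
  let r := findLoopA s s.size x []
  (r.2, r.1.foldr (fun z t => pvASet t z r.2) s)

-- UnionFind.union_set (the Bool Python returns is never used by gcdSort; the mutated state is returned)
def unionSetA (s : Array Int) (rk : Array Int) (x y : Int) : Array Int × Array Int :=
  let fx := findSetA s x
  let fy := findSetA fx.2 y
  if fx.1 = fy.1 then (fy.2, rk)
  else if pvAGet rk fx.1 0 < pvAGet rk fy.1 0 then
    (pvASet fy.2 fx.1 fy.1, rk)
  else if pvAGet rk fy.1 0 < pvAGet rk fx.1 0 then
    (pvASet fy.2 fy.1 fx.1, rk)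
  else
    (pvASet fy.2 fy.1 fx.1, pvASet rk fx.1 (pvAGet rk fx.1 0 + 1))

-- body of the inner sieve loop: is_prime[j] = False; if j in lookup: union(i-1, j-1)
def sieveInnerA (lookup : PySem.Set Int) (i : Int) (st : Array Bool × (Array Int × Array Int)) (j : Int) :
    Array Bool × (Array Int × Array Int) :=
  let isp := pvASet st.1 j false
  if PySem.Set.contains lookup j then (isp, unionSetA st.2.1 st.2.2 (i-1) (j-1))
  else (isp, st.2)

-- modified_sieve_of_eratosthenes
def sieveA (n : Int) (lookup : PySem.Set Int) (uf : Array Int × Array Int) : Array Int × Array Int :=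
  if n < 2 then uf
  else
    let isp0 : Array Bool := (List.replicate (n+1).toNat true).toArray
    let res := (PySem.List.pyRange 2 (isp0.size : Int) 1).foldl
      (fun st i =>
        if pvAGet st.1 i true = false then st
        else (PySem.List.pyRange (i+i) ((st.1.size : Int)) i).foldl (sieveInnerA lookup i) st)
      (isp0, uf)
    res.2

-- all(uf.find_set(a-1) == uf.find_set(b-1) for a, b in zip(nums, sorted(nums))) — short-circuiting, state threaded
def checkA (uf : Array Int × Array Int) : List (Int × Int) → Bool
  | [] => true
  | p :: rest =>
    let fa := findSetA uf.1 (p.1 - 1)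
    let fb := findSetA fa.2 (p.2 - 1)
    if fa.1 = fb.1 then checkA (fb.2, uf.2) rest else false

def gcdSort (nums : List Int) : Bool :=
  match PySem.List.max? nums (fun v => v) with
  | none => false  -- max([]) raises ValueError: unreachable under Pre_
  | some m =>
    let uf := sieveA m (PySem.Set.ofList nums)
      ((PySem.List.pyRange 0 m 1).toArray, (List.replicate m.toNat (0:Int)).toArray)
    checkA uf (nums.zip (PySem.List.sorted nums (fun v => v) false))

-- ===== PORT B =====
-- find(i): naive root chase, no mutation; fuel = array size never exhausts under Pre_
def findB (par : Array Int) : Nat → Int → Int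
  | 0, x => x
  | fuel+1, x =>
    if pvAGet par x 0 ≠ x then findB par fuel (pvAGet par x 0) else x

-- union(i, j): parent[find(i)] = find(j)
def unionB (par : Array Int) (x y : Int) : Array Int :=
  let rx := findB par par.size x
  let ry := findB par par.size y
  if rx ≠ ry then pvASet par rx ry else par

-- while v % d == 0: v //= d
def divOutB (d : Int) : Nat → Int → Int
  | 0, v => v
  | fuel+1, v => if PySem.Int.mod v d = 0 then divOutB d fuel (PySem.Int.floordiv v d) else v

-- while d * d <= v: if v % d == 0: union(x-1, d-1); divide out d; d += 1 — returns (final v, parent)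
def trialLoopB (x : Int) : Nat → Int → Int → Array Int → Int × Array Int
  | 0, _, v, par => (v, par)
  | fuel+1, d, v, par =>
    if d * d ≤ v then
      if PySem.Int.mod v d = 0 then
        trialLoopB x fuel (d+1) (divOutB d v.toNat v) (unionB par (x-1) (d-1))
      else trialLoopB x fuel (d+1) v par
    else (v, par)

-- the per-element body: trial division, then 'if v > 1: union(x-1, v-1)'
def factorB (par : Array Int) (x : Int) : Array Int :=
  let r := trialLoopB x (x.toNat + 2) 2 x par
  if 1 < r.1 then unionB r.2 (x-1) (r.1-1) else r.2

def gcdSort_alt (nums : List Int) : Bool :=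
  match PySem.List.max? nums (fun v => v) with
  | none => false  -- max([]) raises ValueError: unreachable under Pre_
  | some m =>
    let par := (PySem.Set.ofList nums).foldl
      (fun par x => if x < 2 then par else factorB par x)
      (PySem.List.pyRange 0 m 1).toArray
    (nums.zip (PySem.List.sorted nums (fun v => v) false)).all
      (fun p => findB par par.size (p.1 - 1) == findB par par.size (p.2 - 1))

-- ===== PRECONDITION & SPEC =====
-- Pre_ is exactly the set of inputs on which A returns: on the empty list max([]) raises ValueError,
-- and when max(nums) < 1 or some element is below 1 - max(nums) the index a-1 is out of range and A
-- raises IndexError (B raises the same exceptions there).  Equivalently: every element a has some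
-- element b with 1 - b ≤ a.
def Pre_gcdSort (nums : List Int) : Prop := nums ≠ [] ∧ ∀ a ∈ nums, ∃ b ∈ nums, 1 - b ≤ a
instance (nums : List Int) : Decidable (Pre_gcdSort nums) := by unfold Pre_gcdSort; infer_instance
def pvWitness_gcdSort : List Int := ([10, 5, 9, 3, 15])

def Spec_gcdSort (nums : List Int) (out : Bool) : Prop := out = gcdSort_alt nums
instance (nums : List Int) (out : Bool) : Decidable (Spec_gcdSort nums out) := by unfold Spec_gcdSort; infer_instance

-- ===== CLAIM (what is proved, stated in full; the proofs are below) =====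
def Claim_equal_gcdSort : Prop := ∀ (nums : List Int), Dom_gcdSort nums → Pre_gcdSort nums → Spec_gcdSort nums (gcdSort nums)

-- ===== LEMMAS AND PROOFS =====

-- ---------- generic union-find layer (shared by the analyses of both ports) ----------

def PInR (n : Nat) (x : Int) : Prop := 0 ≤ x ∧ x < (n : Int)

def pvStep (s : Array Int) (x : Int) : Int := pvAGet s x 0

def pvIter (s : Array Int) : Nat → Int → Int
  | 0, x => x
  | k+1, x => pvIter s k (pvStep s x)

def pvRoot (s : Array Int) (x : Int) : Prop := pvStep s x = x

def pvReach (s : Array Int) (x r : Int) (k : Nat) : Prop := pvIter s k x = r ∧ pvRoot s r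

def pvGood (s : Array Int) : Prop :=
  (∀ x, PInR s.size x → PInR s.size (pvStep s x)) ∧
  (∀ x, PInR s.size x → ∃ r k, pvReach s x r k)

def rootD (s : Array Int) (x : Int) : Int := findB s s.size x

def pvEqv (s : Array Int) (a b : Int) : Prop := rootD s a = rootD s b

def pvInv (s : Array Int) (R : Int → Int → Prop) : Prop :=
  pvGood s ∧ ∀ a b, PInR s.size a → PInR s.size b → (pvEqv s a b ↔ Relation.EqvGen R a b)

lemma pvIter_add (s : Array Int) (k j : Nat) : ∀ x, pvIter s (k + j) x = pvIter s j (pvIter s k x) := by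
  induction k with
  | zero => intro x; rw [Nat.zero_add]; rfl
  | succ k ih =>
    intro x
    have : k + 1 + j = (k + j) + 1 := by omega
    rw [this]
    show pvIter s (k + j) (pvStep s x) = _
    rw [ih (pvStep s x)]
    rfl

lemma pvIter_root {s : Array Int} {r : Int} (h : pvRoot s r) : ∀ k, pvIter s k r = r := by
  intro k
  induction k with
  | zero => rfl
  | succ k ih => show pvIter s k (pvStep s r) = r; rw [h]; exact ih

lemma pvReach_uniq {s : Array Int} {x r r' : Int} {k k' : Nat}
    (h : pvReach s x r k) (h' : pvReach s x r' k') : r = r' := by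
  rcases h with ⟨h1, h2⟩
  rcases h' with ⟨h1', h2'⟩
  rcases le_total k k' with hle | hle
  · have : k + (k' - k) = k' := by omega
    calc r = pvIter s (k' - k) r := (pvIter_root h2 _).symm
    _ = pvIter s (k' - k) (pvIter s k x) := by rw [h1]
    _ = pvIter s k' x := by rw [← pvIter_add, this]
    _ = r' := h1'
  · have : k' + (k - k') = k := by omega
    calc r = pvIter s k x := h1.symm
    _ = pvIter s (k - k') (pvIter s k' x) := by rw [← pvIter_add, this]
    _ = pvIter s (k - k') r' := by rw [h1']
    _ = r' := pvIter_root h2' _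

lemma findB_eq_of_reach {s : Array Int} {x r : Int} {k f : Nat}
    (hk : k ≤ f) (h : pvReach s x r k) : findB s f x = r := by
  induction k generalizing x f with
  | zero =>
    rcases h with ⟨h1, h2⟩
    have h1' : x = r := h1
    subst h1'
    cases f with
    | zero => rfl
    | succ f =>
      have h2' : pvAGet s x 0 = x := h2
      simp [findB, h2']
  | succ k ih =>
    rcases h with ⟨h1, h2⟩
    by_cases hr : pvRoot s x
    · have hx : pvIter s (k+1) x = x := pvIter_root hr _
      rw [hx] at h1; subst h1
      cases f with
      | zero => rfl
      | succ f =>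
        have hr' : pvAGet s x 0 = x := hr
        simp [findB, hr']
    · cases f with
      | zero => omega
      | succ f =>
        have hstep : pvReach s (pvStep s x) r k := ⟨h1, h2⟩
        simp only [findB]
        have hne : pvAGet s x 0 ≠ x := hr
        rw [if_pos hne]
        exact ih (by omega) hstep

lemma pvIter_inR {s : Array Int} (hP : ∀ y, PInR s.size y → PInR s.size (pvStep s y)) :
    ∀ (i : Nat) (x : Int), PInR s.size x → PInR s.size (pvIter s i x) := by
  intro i
  induction i with
  | zero => intro x hx; exact hx
  | succ i ih => intro x hx; exact ih _ (hP _ hx)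

lemma pvReach_small {s : Array Int} {x r : Int} {k : Nat}
    (hP : ∀ y, PInR s.size y → PInR s.size (pvStep s y))
    (hx : PInR s.size x) (h : pvReach s x r k) : ∃ k' < s.size, pvReach s x r k' := by
  induction k using Nat.strong_induction_on with
  | _ k ih =>
  by_cases hk : k < s.size
  · exact ⟨k, hk, h⟩
  · -- pigeonhole: two of the first length+1 iterates coincide
    have hn : 0 < s.size := by
      rcases hx with ⟨hx0, hx1⟩
      by_contra hc
      have : s.size = 0 := by omega
      rw [this] at hx1; omega
    have hinr : ∀ i : Nat, PInR s.size (pvIter s i x) := fun i => pvIter_inR hP i x hx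
    let g : Fin (s.size + 1) → Fin s.size := fun i =>
      ⟨(pvIter s i.1 x).toNat, by
        rcases hinr i.1 with ⟨h0, h1⟩
        omega⟩
    obtain ⟨i, j, hij, hgij⟩ := Fintype.exists_ne_map_eq_of_card_lt g (by simp)
    have hiter : pvIter s i.1 x = pvIter s j.1 x := by
      have := congrArg Fin.val hgij
      simp only [g] at this
      rcases hinr i.1 with ⟨h0, _⟩
      rcases hinr j.1 with ⟨h0', _⟩
      omega
    -- wlog i < j
    rcases Nat.lt_or_ge i.1 j.1 with hlt | hge
    · have hjk : j.1 ≤ s.size := by omega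
      have hjlek : j.1 ≤ k := by omega
      have hrepl : pvReach s x r (k - (j.1 - i.1)) := by
        refine ⟨?_, h.2⟩
        have h1 : k = j.1 + (k - j.1) := by omega
        have h2 : pvIter s k x = pvIter s (k - j.1) (pvIter s j.1 x) := by
          rw [← pvIter_add]; rw [← h1]
        have h3 : pvIter s (k - (j.1 - i.1)) x = pvIter s (k - j.1) (pvIter s i.1 x) := by
          rw [← pvIter_add]
          congr 1
          omega
        rw [h3, hiter, ← h2, h.1]
      exact ih _ (by omega) hrepl
    · have hlt : j.1 < i.1 := by
        rcases Nat.lt_or_ge j.1 i.1 with h' | h'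
        · exact h'
        · exact absurd (Fin.ext (by omega)) hij
      have hik : i.1 ≤ s.size := by omega
      have hrepl : pvReach s x r (k - (i.1 - j.1)) := by
        refine ⟨?_, h.2⟩
        have h1 : k = i.1 + (k - i.1) := by omega
        have h2 : pvIter s k x = pvIter s (k - i.1) (pvIter s i.1 x) := by
          rw [← pvIter_add]; rw [← h1]
        have h3 : pvIter s (k - (i.1 - j.1)) x = pvIter s (k - i.1) (pvIter s j.1 x) := by
          rw [← pvIter_add]
          congr 1
          omega
        rw [h3, ← hiter, ← h2, h.1]
      exact ih _ (by omega) hrepl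

lemma pvGood_reach {s : Array Int} {x : Int} (hG : pvGood s) (hx : PInR s.size x) :
    ∃ k ≤ s.size, pvReach s x (rootD s x) k := by
  obtain ⟨r, k, hr⟩ := hG.2 x hx
  obtain ⟨k', hk', hr'⟩ := pvReach_small hG.1 hx hr
  have : findB s s.size x = r := findB_eq_of_reach (by omega) hr'
  rw [show rootD s x = r from this]
  exact ⟨k', by omega, hr'⟩

lemma pvGood_reach_lt {s : Array Int} {x : Int} (hG : pvGood s) (hx : PInR s.size x) :
    ∃ k < s.size, pvReach s x (rootD s x) k := by
  obtain ⟨r, k, hr⟩ := hG.2 x hx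
  obtain ⟨k', hk', hr'⟩ := pvReach_small hG.1 hx hr
  have : findB s s.size x = r := findB_eq_of_reach (by omega) hr'
  rw [show rootD s x = r from this]
  exact ⟨k', hk', hr'⟩

lemma rootD_eq_of_reach {s : Array Int} {x r : Int} {k : Nat} (hG : pvGood s)
    (hx : PInR s.size x) (h : pvReach s x r k) : rootD s x = r := by
  obtain ⟨k', _, hr'⟩ := pvGood_reach hG hx
  exact pvReach_uniq hr' h

lemma rootD_root {s : Array Int} {x : Int} (hG : pvGood s) (hx : PInR s.size x) :
    pvRoot s (rootD s x) ∧ PInR s.size (rootD s x) := by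
  obtain ⟨k, _, hr⟩ := pvGood_reach hG hx
  refine ⟨hr.2, ?_⟩
  rw [← hr.1]
  exact pvIter_inR hG.1 k x hx

lemma rootD_of_root {s : Array Int} {x : Int} (h : pvRoot s x) : rootD s x = x := by
  exact findB_eq_of_reach (Nat.zero_le _) ⟨rfl, h⟩

lemma pvAGet_eq_getElem {α : Type} (s : Array α) (i : Int) (d : α)
    (h0 : 0 ≤ i) (h1 : i < (s.size : Int)) : pvAGet s i d = s[i.toNat]'(by omega) := by
  simp only [pvAGet, if_pos h0, Array.getD]
  rw [dif_pos (by omega)]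
  rfl

lemma size_pvASet {α : Type} (s : Array α) (i : Int) (v : α) : (pvASet s i v).size = s.size := by
  unfold pvASet
  split <;> simp

lemma pyGetD_set {α : Type} (l : Array α) (z y : Int) (v d : α)
    (hz0 : 0 ≤ z) (hzl : z < (l.size : Int)) (hy0 : 0 ≤ y) (hyl : y < (l.size : Int)) :
    pvAGet (pvASet l z v) y d = if y = z then v else pvAGet l y d := by
  rw [pvAGet_eq_getElem _ _ d hy0 (by rw [size_pvASet]; exact hyl),
    pvAGet_eq_getElem _ _ d hy0 hyl]
  simp only [pvASet, if_pos hz0]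
  rw [Array.getElem_setIfInBounds]
  by_cases h : y = z
  · subst h; simp
  · have : z.toNat ≠ y.toNat := by omega
    simp [this, h]
  omega

lemma pvAGet_wrap {α : Type} (s : Array α) (i : Int) (d : α)
    (h0 : -(s.size : Int) ≤ i) (h1 : i < 0) : pvAGet s i d = pvAGet s (i + s.size) d := by
  unfold pvAGet
  rw [if_neg (by omega), if_pos (by omega)]
  congr 1
  omega

lemma pvASet_wrap {α : Type} (s : Array α) (i : Int) (v : α)
    (h0 : -(s.size : Int) ≤ i) (h1 : i < 0) : pvASet s i v = pvASet s (i + s.size) v := by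
  unfold pvASet
  rw [if_neg (by omega), if_pos (by omega)]
  congr 1
  omega

lemma pvASet_self {α : Type} (s : Array α) (z : Int) (v d : α)
    (hz0 : 0 ≤ z) (hzl : z < (s.size : Int)) (h : pvAGet s z d = v) : pvASet s z v = s := by
  refine Array.ext (size_pvASet s z v) ?_
  intro i hi1 hi2
  rw [pvAGet_eq_getElem _ _ d hz0 hzl] at h
  simp only [pvASet, if_pos hz0]
  rw [Array.getElem_setIfInBounds]
  by_cases he : z.toNat = i
  · subst he; rw [if_pos rfl, ← h]
  · rw [if_neg he]

lemma rootD_wrap {s : Array Int} {x : Int} (hG : pvGood s)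
    (h0 : -(s.size : Int) ≤ x) (h1 : x < 0) : rootD s x = rootD s (x + s.size) := by
  have hxn : PInR s.size (x + s.size) := ⟨by omega, by omega⟩
  obtain ⟨k, hk, hre⟩ := pvGood_reach_lt hG hxn
  have hstep : pvStep s x = pvStep s (x + s.size) := pvAGet_wrap s x 0 h0 h1
  have hre' : pvReach s x (rootD s (x + s.size)) (k+1) := by
    refine ⟨?_, hre.2⟩
    calc pvIter s (k+1) x = pvIter s k (pvStep s x) := rfl
    _ = pvIter s k (pvStep s (x + s.size)) := by rw [hstep]
    _ = pvIter s (k+1) (x + s.size) := rfl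
    _ = pvIter s 1 (pvIter s k (x + s.size)) := by rw [← pvIter_add]
    _ = pvIter s 1 (rootD s (x + s.size)) := by rw [hre.1]
    _ = rootD s (x + s.size) := by
        show pvIter s 0 (pvStep s (rootD s (x + s.size))) = _
        rw [hre.2]
        rfl
  exact findB_eq_of_reach (by omega) hre'

lemma set_root {s : Array Int} {z r : Int} (hG : pvGood s) (hz : PInR s.size z)
    (hr : PInR s.size r) (hroot : pvRoot s r) (hne : z ≠ r)
    (hcase : rootD s z = r ∨ pvRoot s z) :
    pvGood (pvASet s z r) ∧
    ∀ y, PInR s.size y →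
      rootD (pvASet s z r) y = if rootD s y = rootD s z then r else rootD s y := by
  set s' := pvASet s z r with hs'
  have hlen : s'.size = s.size := by
    rw [hs']; exact size_pvASet s z r
  have hstep : ∀ y, PInR s.size y → pvStep s' y = if y = z then r else pvStep s y := by
    intro y hy
    exact pyGetD_set s z y r 0 hz.1 hz.2 hy.1 hy.2
  have hroot' : pvRoot s' r := by
    have := hstep r hr
    rw [if_neg (Ne.symm hne)] at this
    show pvStep s' r = r
    rw [this]; exact hroot
  -- the base case: y a root of s
  have hbase : ∀ y, PInR s.size y → pvRoot s y →
      ∃ k', pvReach s' y (if y = rootD s z then r else y) k' := by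
    intro y hy hyr
    by_cases hyz : y = z
    · subst hyz
      have h1 : rootD s y = y := rootD_of_root hyr
      rw [if_pos h1.symm]
      refine ⟨1, ?_, hroot'⟩
      show pvStep s' y = r
      rw [hstep y hy, if_pos rfl]
    · have hry : pvRoot s' y := by
        show pvStep s' y = y
        rw [hstep y hy, if_neg hyz]; exact hyr
      by_cases hrz : y = rootD s z
      · rcases hcase with hc | hc
        · rw [if_pos hrz]
          have hyr' : y = r := hrz.trans hc
          exact ⟨0, hyr', hroot'⟩
        · exact absurd (hrz.trans (rootD_of_root hc)) hyz
      · rw [if_neg hrz]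
        exact ⟨0, rfl, hry⟩
  have hclaim : ∀ (k : Nat) (y ry : Int), PInR s.size y → pvReach s y ry k →
      ∃ k', pvReach s' y (if ry = rootD s z then r else ry) k' := by
    intro k
    induction k with
    | zero =>
      intro y ry hy hre
      have h1 : y = ry := hre.1
      subst h1
      exact hbase y hy hre.2
    | succ k ih =>
      intro y ry hy hre
      by_cases hyr : pvRoot s y
      · have h1 : y = ry := by
          have h2 := hre.1
          rw [pvIter_root hyr] at h2
          exact h2
        subst h1
        exact hbase y hy hyr
      · by_cases hyz : y = z
        · subst hyz
          have hc : rootD s y = r := by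
            rcases hcase with hc | hc
            · exact hc
            · exact absurd hc hyr
          have hry : rootD s y = ry := rootD_eq_of_reach hG hy hre
          rw [if_pos (hry ▸ rfl)]
          refine ⟨1, ?_, hroot'⟩
          show pvStep s' y = r
          rw [hstep y hy, if_pos rfl]
        · have hsy : pvReach s (pvStep s y) ry k := ⟨hre.1, hre.2⟩
          obtain ⟨k', hk'⟩ := ih (pvStep s y) ry (hG.1 y hy) hsy
          refine ⟨k' + 1, ?_, hk'.2⟩
          show pvIter s' k' (pvStep s' y) = _
          rw [hstep y hy, if_neg hyz]
          exact hk'.1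
  have hG' : pvGood s' := by
    constructor
    · intro y hy
      rw [hlen] at hy ⊢
      rw [hstep y hy]
      by_cases h : y = z
      · rw [if_pos h]; exact hr
      · rw [if_neg h]; exact hG.1 y hy
    · intro y hy
      rw [hlen] at hy
      obtain ⟨rr, k, hk⟩ := hG.2 y hy
      obtain ⟨k', hk'⟩ := hclaim k y rr hy hk
      exact ⟨_, k', hk'⟩
  refine ⟨hG', ?_⟩
  intro y hy
  obtain ⟨k, _, hk⟩ := pvGood_reach hG hy
  obtain ⟨k', hk'⟩ := hclaim k y (rootD s y) hy hk
  have : rootD s' y = _ := rootD_eq_of_reach hG' (by rw [hlen]; exact hy) hk'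
  exact this

lemma eqv_join {s s' : Array Int} {x y : Int} (hG : pvGood s) (hG' : pvGood s')
    (hlen : s'.size = s.size) (hx : PInR s.size x) (hy : PInR s.size y)
    (hred : ∀ c, PInR s.size c →
      rootD s' c = if rootD s c = rootD s x then rootD s y else rootD s c) :
    ∀ a b, PInR s.size a → PInR s.size b →
      (pvEqv s' a b ↔ (pvEqv s a b ∨ (pvEqv s a x ∧ pvEqv s b y) ∨ (pvEqv s a y ∧ pvEqv s b x))) := by
  intro a b ha hb
  have hA := hred a ha
  have hB := hred b hb
  show rootD s' a = rootD s' b ↔ _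
  rw [hA, hB]
  show _ ↔ (rootD s a = rootD s b ∨ (rootD s a = rootD s x ∧ rootD s b = rootD s y) ∨
    (rootD s a = rootD s y ∧ rootD s b = rootD s x))
  split_ifs with h1 h2 h2 <;> omega

lemma eqvGen_union_single {α : Type} (R : α → α → Prop) (x y a b : α) :
    Relation.EqvGen (fun u v => R u v ∨ (u = x ∧ v = y)) a b ↔
      (Relation.EqvGen R a b ∨ (Relation.EqvGen R a x ∧ Relation.EqvGen R b y) ∨
        (Relation.EqvGen R a y ∧ Relation.EqvGen R b x)) := by
  constructor
  · intro h
    induction h with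
    | rel u v huv =>
      rcases huv with huv | ⟨hu, hv⟩
      · exact Or.inl (Relation.EqvGen.rel _ _ huv)
      · subst hu; subst hv
        exact Or.inr (Or.inl ⟨Relation.EqvGen.refl _, Relation.EqvGen.refl _⟩)
    | refl u => exact Or.inl (Relation.EqvGen.refl _)
    | symm u v _ ih =>
      rcases ih with h | ⟨h1, h2⟩ | ⟨h1, h2⟩
      · exact Or.inl (Relation.EqvGen.symm _ _ h)
      · exact Or.inr (Or.inr ⟨h2, h1⟩)
      · exact Or.inr (Or.inl ⟨h2, h1⟩)
    | trans u v w _ _ ih1 ih2 =>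
      have tr : ∀ {c d e : α}, Relation.EqvGen R c d → Relation.EqvGen R d e → Relation.EqvGen R c e :=
        fun h1 h2 => Relation.EqvGen.trans _ _ _ h1 h2
      have sy : ∀ {c d : α}, Relation.EqvGen R c d → Relation.EqvGen R d c :=
        fun h => Relation.EqvGen.symm _ _ h
      rcases ih1 with h1 | ⟨h1a, h1b⟩ | ⟨h1a, h1b⟩ <;>
        rcases ih2 with h2 | ⟨h2a, h2b⟩ | ⟨h2a, h2b⟩
      · exact Or.inl (tr h1 h2)
      · exact Or.inr (Or.inl ⟨tr h1 h2a, h2b⟩)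
      · exact Or.inr (Or.inr ⟨tr h1 h2a, h2b⟩)
      · exact Or.inr (Or.inl ⟨h1a, tr (sy h2) h1b⟩)
      · exact Or.inl (tr h1a (tr (sy h2a) (tr h1b (sy h2b))))
      · exact Or.inl (tr h1a (sy h2b))
      · exact Or.inr (Or.inr ⟨h1a, tr (sy h2) h1b⟩)
      · exact Or.inl (tr h1a (sy h2b))
      · exact Or.inl (tr h1a (tr (sy h2a) (tr h1b (sy h2b))))
  · intro h
    have hmono : ∀ {u v : α}, Relation.EqvGen R u v →
        Relation.EqvGen (fun u v => R u v ∨ (u = x ∧ v = y)) u v := by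
      intro u v h
      exact Relation.EqvGen.mono (fun u v huv => Or.inl huv) h
    have hedge : Relation.EqvGen (fun u v => R u v ∨ (u = x ∧ v = y)) x y :=
      Relation.EqvGen.rel _ _ (Or.inr ⟨rfl, rfl⟩)
    rcases h with h | ⟨h1, h2⟩ | ⟨h1, h2⟩
    · exact hmono h
    · exact Relation.EqvGen.trans _ _ _ (Relation.EqvGen.trans _ _ _ (hmono h1) hedge)
        (Relation.EqvGen.symm _ _ (hmono h2))
    · exact Relation.EqvGen.trans _ _ _
        (Relation.EqvGen.trans _ _ _ (hmono h1) (Relation.EqvGen.symm _ _ hedge))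
        (Relation.EqvGen.symm _ _ (hmono h2))

lemma eqvGen_congr {α : Type} {R S : α → α → Prop} (h : ∀ u v, R u v ↔ S u v) {a b : α} :
    Relation.EqvGen R a b ↔ Relation.EqvGen S a b := by
  constructor
  · exact Relation.EqvGen.mono (fun u v huv => (h u v).mp huv)
  · exact Relation.EqvGen.mono (fun u v huv => (h u v).mpr huv)

lemma eqvGen_false {a b : Int} : Relation.EqvGen (fun (_ _ : Int) => False) a b ↔ a = b := by
  constructor
  · intro h
    induction h with
    | rel _ _ h => exact h.elim
    | refl _ => rfl
    | symm _ _ _ ih => exact ih.symm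
    | trans _ _ _ _ _ ih1 ih2 => exact ih1.trans ih2
  · rintro rfl
    exact Relation.EqvGen.refl _

lemma pvInv_congr {s : Array Int} {R S : Int → Int → Prop} (h : pvInv s R)
    (hRS : ∀ u v, R u v ↔ S u v) : pvInv s S := by
  refine ⟨h.1, fun a b ha hb => ?_⟩
  rw [h.2 a b ha hb]
  exact eqvGen_congr hRS

lemma pvInv_extend {s s' : Array Int} {R : Int → Int → Prop} {x y : Int}
    (hInv : pvInv s R) (hlen : s'.size = s.size) (hG' : pvGood s')
    (hx : PInR s.size x) (hy : PInR s.size y)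
    (hjoin : ∀ a b, PInR s.size a → PInR s.size b →
      (pvEqv s' a b ↔ (pvEqv s a b ∨ (pvEqv s a x ∧ pvEqv s b y) ∨ (pvEqv s a y ∧ pvEqv s b x)))) :
    pvInv s' (fun u v => R u v ∨ (u = x ∧ v = y)) := by
  refine ⟨hG', fun a b ha hb => ?_⟩
  rw [hlen] at ha hb
  rw [hjoin a b ha hb, eqvGen_union_single R x y a b]
  rw [hInv.2 a b ha hb, hInv.2 a x ha hx, hInv.2 b y hb hy, hInv.2 a y ha hy, hInv.2 b x hb hx]

lemma init_step (n : Int) (hn : 0 ≤ n) (x : Int)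
    (hx : PInR (PySem.List.pyRange 0 n 1).toArray.size x) :
    pvStep (PySem.List.pyRange 0 n 1).toArray x = x := by
  rcases hx with ⟨hx0, hx1⟩
  show pvAGet (PySem.List.pyRange 0 n 1).toArray x 0 = x
  rw [pvAGet_eq_getElem _ _ 0 hx0 hx1]
  rw [List.getElem_toArray, PySem.List.getElem_pyRange_one]
  omega

lemma init_inv (n : Int) (hn : 0 ≤ n) :
    pvInv (PySem.List.pyRange 0 n 1).toArray (fun _ _ => False) := by
  have hG : pvGood (PySem.List.pyRange 0 n 1).toArray := by
    constructor
    · intro x hx; rw [init_step n hn x hx]; exact hx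
    · intro x hx; exact ⟨x, 0, rfl, init_step n hn x hx⟩
  refine ⟨hG, fun a b ha hb => ?_⟩
  show rootD _ a = rootD _ b ↔ _
  rw [rootD_of_root (init_step n hn a ha), rootD_of_root (init_step n hn b hb), eqvGen_false]

-- ---------- analysis of port A's union-find (path compression, rank) ----------

lemma findLoopA_spec {s : Array Int} (hG : pvGood s) :
    ∀ (k f : Nat) (x : Int) (stk : List Int), k ≤ f → PInR s.size x →
      pvReach s x (rootD s x) k →
      ∃ path, findLoopA s f x stk = (stk ++ path, rootD s x) ∧
        ∀ z ∈ path, PInR s.size z ∧ ¬ pvRoot s z ∧ rootD s z = rootD s x := by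
  intro k
  induction k with
  | zero =>
    intro f x stk _ hx hre
    have h1 : x = rootD s x := hre.1
    have h2 : pvRoot s x := h1 ▸ hre.2
    have h2' : pvAGet s x 0 = x := h2
    refine ⟨[], ?_, by simp⟩
    cases f with
    | zero => simp [findLoopA, ← h1]
    | succ f => simp [findLoopA, h2', ← h1]
  | succ k ih =>
    intro f x stk hk hx hre
    by_cases hxr : pvRoot s x
    · have h1 : rootD s x = x := rootD_of_root hxr
      have h2' : pvAGet s x 0 = x := hxr
      refine ⟨[], ?_, by simp⟩
      cases f with
      | zero => simp [findLoopA, h1]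
      | succ f => simp [findLoopA, h2', h1]
    · cases f with
      | zero => omega
      | succ f =>
        have hne : pvAGet s x 0 ≠ x := hxr
        have hstep_in : PInR s.size (pvStep s x) := hG.1 x hx
        have hre' : pvReach s (pvStep s x) (rootD s x) k := ⟨hre.1, hre.2⟩
        have hroot_eq : rootD s (pvStep s x) = rootD s x :=
          rootD_eq_of_reach hG hstep_in hre'
        obtain ⟨path, hres, hprop⟩ := ih f (pvStep s x) (stk ++ [x]) (by omega) hstep_in
          (by rw [hroot_eq]; exact hre')
        refine ⟨x :: path, ?_, ?_⟩
        · show findLoopA s (f+1) x stk = _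
          simp only [findLoopA]
          rw [if_pos hne]
          show findLoopA s f (pvStep s x) (stk ++ [x]) = _
          rw [hres, hroot_eq]
          simp
        · intro z hz
          rw [List.mem_cons] at hz
          rcases hz with hz | hz
          subst hz
          · exact ⟨hx, hxr, rfl⟩
          · obtain ⟨hz1, hz2, hz3⟩ := hprop z hz
            exact ⟨hz1, hz2, hz3.trans hroot_eq⟩

lemma compress_spec {s : Array Int} {r : Int} (hG : pvGood s) (hroot : pvRoot s r)
    (hr : PInR s.size r) :
    ∀ (L : List Int), (∀ z ∈ L, PInR s.size z ∧ ¬ pvRoot s z ∧ rootD s z = r) →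
      pvGood (L.foldr (fun z t => pvASet t z r) s) ∧
      (L.foldr (fun z t => pvASet t z r) s).size = s.size ∧
      ∀ y, PInR s.size y → rootD (L.foldr (fun z t => pvASet t z r) s) y = rootD s y := by
  intro L
  induction L with
  | nil => exact fun _ => ⟨hG, rfl, fun y _ => rfl⟩
  | cons z L ihL =>
    intro hmem
    obtain ⟨hG1, hlen1, hr1⟩ := ihL (fun w hw => hmem w (List.mem_cons_of_mem z hw))
    obtain ⟨hzin, hznr, hzroot⟩ := hmem z (List.mem_cons_self)
    set t1 := L.foldr (fun z t => pvASet t z r) s with ht1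
    have hrr : rootD t1 r = r := by
      rw [hr1 _ hr]
      exact rootD_of_root hroot
    have hroott1 : pvRoot t1 r := by
      have := (rootD_root hG1 (by rw [hlen1]; exact hr)).1
      rwa [hrr] at this
    have hzne : z ≠ r := by
      intro h
      exact hznr (h ▸ hroot)
    have hcase : rootD t1 z = r := by
      rw [hr1 _ hzin, hzroot]
    obtain ⟨hG2, hr2⟩ := set_root hG1 (by rw [hlen1]; exact hzin)
      (by rw [hlen1]; exact hr) hroott1 hzne (Or.inl hcase)
    refine ⟨hG2, ?_, ?_⟩
    · show (pvASet t1 z r).size = s.size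
      rw [size_pvASet, hlen1]
    · intro y hy
      show rootD (pvASet t1 z r) y = rootD s y
      have := hr2 y (by rw [hlen1]; exact hy)
      rw [this, hr1 y hy, hcase]
      by_cases h : rootD s y = r
      · rw [if_pos h, h]
      · rw [if_neg h]

lemma findSetA_spec {s : Array Int} {x : Int} (hG : pvGood s)
    (hx0 : -(s.size : Int) ≤ x) (hx1 : x < (s.size : Int)) :
    (findSetA s x).1 = rootD s x ∧ pvGood (findSetA s x).2 ∧
    (findSetA s x).2.size = s.size ∧
    ∀ y, PInR s.size y → rootD (findSetA s x).2 y = rootD s y := by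
  by_cases hxn : 0 ≤ x
  · -- in-range index
    have hx : PInR s.size x := ⟨hxn, hx1⟩
    obtain ⟨k, hk, hre⟩ := pvGood_reach hG hx
    obtain ⟨path, hres, hprop⟩ := findLoopA_spec hG k s.size x [] hk hx hre
    have hrx := rootD_root hG hx
    obtain ⟨hG2, hlen2, hr2⟩ := compress_spec hG hrx.1 hrx.2 path hprop
    have h1 : findSetA s x = (rootD s x, path.foldr (fun z t => pvASet t z (rootD s x)) s) := by
      simp [findSetA, hres]
    rw [h1]
    exact ⟨rfl, hG2, hlen2, hr2⟩
  · -- negative index: Python wraparound; the walk normalizes after the first step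
    have hxlt : x < 0 := by omega
    have hn1 : 1 ≤ s.size := by omega
    have hxn' : PInR s.size (x + s.size) := ⟨by omega, by omega⟩
    have hstep : pvStep s x = pvStep s (x + s.size) := pvAGet_wrap s x 0 (by omega) hxlt
    have hv : PInR s.size (pvStep s x) := by rw [hstep]; exact hG.1 _ hxn'
    have hwrap : rootD s x = rootD s (x + s.size) := rootD_wrap hG (by omega) hxlt
    -- a short reach witness for the first-step value
    obtain ⟨k, hk, hre⟩ := pvGood_reach_lt hG hxn'
    have hrev : ∃ k' ≤ s.size - 1, pvReach s (pvStep s x) (rootD s (x + s.size)) k' := by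
      cases k with
      | zero =>
        refine ⟨0, by omega, ?_, hre.2⟩
        have hroot : x + s.size = rootD s (x + s.size) := hre.1
        show pvStep s x = _
        rw [hstep, ← hroot]
        rw [← hroot] at hre
        exact hre.2
      | succ k0 =>
        refine ⟨k0, by omega, ?_, hre.2⟩
        rw [hstep]
        exact hre.1
    obtain ⟨k', hk', hrev⟩ := hrev
    have hrootv : rootD s (pvStep s x) = rootD s (x + s.size) :=
      rootD_eq_of_reach hG hv hrev
    -- unfold the first loop iteration
    obtain ⟨n', hn'⟩ : ∃ n', s.size = n' + 1 := ⟨s.size - 1, by omega⟩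
    have hne0 : pvAGet s x 0 ≠ x := by
      intro h
      have : pvStep s x = x := h
      rcases hv with ⟨hv0, _⟩
      rw [this] at hv0
      omega
    have hloop1 : findLoopA s s.size x [] = findLoopA s n' (pvStep s x) [x] := by
      rw [hn']
      simp only [findLoopA]
      rw [if_pos hne0]
      rfl
    obtain ⟨path, hres, hprop⟩ := findLoopA_spec hG k' n' (pvStep s x) [x] (by omega) hv
      (by rw [hrootv]; exact hrev)
    have hres' : findLoopA s s.size x [] = (x :: path, rootD s x) := by
      rw [hloop1, hres, hrootv, ← hwrap]
      rfl
    have hrx : pvRoot s (rootD s x) ∧ PInR s.size (rootD s x) := by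
      rw [hwrap]
      exact rootD_root hG hxn'
    obtain ⟨hG2, hlen2, hr2⟩ := compress_spec hG hrx.1 hrx.2 path
      (fun z hz => by
        obtain ⟨h1, h2, h3⟩ := hprop z hz
        exact ⟨h1, h2, by rw [h3, hrootv, ← hwrap]⟩)
    set t1 := path.foldr (fun z t => pvASet t z (rootD s x)) s with ht1
    have h1 : findSetA s x = (rootD s x, pvASet t1 x (rootD s x)) := by
      simp [findSetA, hres', ← ht1]
    have hsetw : pvASet t1 x (rootD s x) = pvASet t1 (x + s.size) (rootD s x) := by
      rw [pvASet_wrap t1 x _ (by rw [hlen2]; omega) hxlt, hlen2]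
    have hroott1 : pvRoot t1 (rootD s x) := by
      have hq : rootD t1 (rootD s x) = rootD s x := by
        rw [hr2 _ hrx.2]
        exact rootD_of_root hrx.1
      have := (rootD_root hG2 (by rw [hlen2]; exact hrx.2)).1
      rwa [hq] at this
    have hcaset1 : rootD t1 (x + s.size) = rootD s x := by
      rw [hr2 _ hxn', ← hwrap]
    by_cases heqr : x + s.size = rootD s x
    · -- the wrapped slot is already the root: the write stores its own value
      have hsame : pvASet t1 (x + s.size) (rootD s x) = t1 := by
        refine pvASet_self t1 (x + s.size) _ 0 (by omega) (by rw [hlen2]; omega) ?_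
        show pvStep t1 (x + s.size) = rootD s x
        rw [heqr]
        exact hroott1
      rw [h1, hsetw, hsame]
      exact ⟨rfl, hG2, hlen2, hr2⟩
    · obtain ⟨hG3, hr3⟩ := set_root hG2 (by rw [hlen2]; exact hxn')
        (by rw [hlen2]; exact hrx.2) hroott1 heqr (Or.inl hcaset1)
      rw [h1, hsetw]
      refine ⟨rfl, hG3, ?_, ?_⟩
      · rw [size_pvASet, hlen2]
      · intro y hy
        have := hr3 y (by rw [hlen2]; exact hy)
        rw [this, hcaset1, hr2 y hy]
        by_cases h : rootD s y = rootD s x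
        · rw [if_pos h, h]
        · rw [if_neg h]

lemma unionSetA_spec {s rk : Array Int} {x y : Int} (hG : pvGood s)
    (hx : PInR s.size x) (hy : PInR s.size y) :
    pvGood (unionSetA s rk x y).1 ∧ (unionSetA s rk x y).1.size = s.size ∧
    ∀ a b, PInR s.size a → PInR s.size b →
      (pvEqv (unionSetA s rk x y).1 a b ↔
        (pvEqv s a b ∨ (pvEqv s a x ∧ pvEqv s b y) ∨ (pvEqv s a y ∧ pvEqv s b x))) := by
  obtain ⟨hfx1, hGx, hlenx, hrx⟩ := findSetA_spec (x := x) hG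
    (by rcases hx with ⟨h0, h1⟩; omega) hx.2
  set s1 := (findSetA s x).2 with hs1
  obtain ⟨hfy1, hGy, hleny, hry⟩ := findSetA_spec (x := y) hGx
    (by rw [hlenx]; rcases hy with ⟨h0, h1⟩; omega) (by rw [hlenx]; exact hy.2)
  set s2 := (findSetA s1 y).2 with hs2
  have hlen2 : s2.size = s.size := by rw [hleny, hlenx]
  have hry' : ∀ c, PInR s.size c → rootD s2 c = rootD s c := by
    intro c hc
    rw [hry c (by rw [hlenx]; exact hc), hrx c hc]
  have hfx1' : (findSetA s x).1 = rootD s x := hfx1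
  have hfy1' : (findSetA s1 y).1 = rootD s y := by
    rw [hfy1, hrx y hy]
  have hrootx := rootD_root hG hx
  have hrooty := rootD_root hG hy
  -- roots of s are still roots of s2
  have hroot2 : ∀ c, PInR s.size c → pvRoot s2 (rootD s c) := by
    intro c hc
    have h1 : rootD s2 (rootD s c) = rootD s c := by
      rw [hry' _ (rootD_root hG hc).2]
      exact rootD_of_root (rootD_root hG hc).1
    have := (rootD_root hGy (by rw [hlen2]; exact (rootD_root hG hc).2)).1
    rwa [h1] at this
  -- generic: one orientation of the final set
  have horient : ∀ u v : Int, PInR s.size u → PInR s.size v → rootD s u ≠ rootD s v →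
      pvGood (pvASet s2 (rootD s u) (rootD s v)) ∧
      (pvASet s2 (rootD s u) (rootD s v)).size = s.size ∧
      ∀ a b, PInR s.size a → PInR s.size b →
        (pvEqv (pvASet s2 (rootD s u) (rootD s v)) a b ↔
          (pvEqv s a b ∨ (pvEqv s a u ∧ pvEqv s b v) ∨ (pvEqv s a v ∧ pvEqv s b u))) := by
    intro u v hu hv hne
    have hru := rootD_root hG hu
    have hrv := rootD_root hG hv
    obtain ⟨hG3, hr3⟩ := set_root hGy (by rw [hlen2]; exact hru.2) (by rw [hlen2]; exact hrv.2)
      (hroot2 v hv) hne (Or.inr (hroot2 u hu))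
    have hlen3 : (pvASet s2 (rootD s u) (rootD s v)).size = s.size := by
      rw [size_pvASet, hlen2]
    refine ⟨hG3, hlen3, ?_⟩
    have hred : ∀ c, PInR s.size c →
        rootD (pvASet s2 (rootD s u) (rootD s v)) c =
          if rootD s c = rootD s u then rootD s v else rootD s c := by
      intro c hc
      have := hr3 c (by rw [hlen2]; exact hc)
      rw [hry' c hc] at this
      rw [this]
      have hzz : rootD s2 (rootD s u) = rootD s u := by
        rw [hry' _ hru.2]
        exact rootD_of_root hru.1
      rw [hzz]
    exact eqv_join hG hG3 hlen3 hu hv hred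
  show pvGood (unionSetA s rk x y).1 ∧ _
  simp only [unionSetA, ← hs1, ← hs2, hfx1', hfy1']
  by_cases heq : rootD s x = rootD s y
  · rw [if_pos heq]
    refine ⟨hGy, hlen2, ?_⟩
    intro a b ha hb
    show pvEqv s2 a b ↔ _
    have : pvEqv s2 a b ↔ pvEqv s a b := by
      show rootD s2 a = rootD s2 b ↔ _
      rw [hry' a ha, hry' b hb]; rfl
    rw [this]
    show rootD s a = rootD s b ↔ _
    show _ ↔ (rootD s a = rootD s b ∨ (rootD s a = rootD s x ∧ rootD s b = rootD s y) ∨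
      (rootD s a = rootD s y ∧ rootD s b = rootD s x))
    omega
  · rw [if_neg heq]
    split_ifs with h1 h2
    · obtain ⟨hA, hB, hC⟩ := horient x y hx hy heq
      exact ⟨hA, hB, hC⟩
    · obtain ⟨hA, hB, hC⟩ := horient y x hy hx (Ne.symm heq)
      refine ⟨hA, hB, ?_⟩
      intro a b ha hb
      rw [hC a b ha hb]
      constructor
      · rintro (h | ⟨ha1, hb1⟩ | ⟨ha1, hb1⟩)
        · exact Or.inl h
        · exact Or.inr (Or.inr ⟨ha1, hb1⟩)
        · exact Or.inr (Or.inl ⟨ha1, hb1⟩)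
      · rintro (h | ⟨ha1, hb1⟩ | ⟨ha1, hb1⟩)
        · exact Or.inl h
        · exact Or.inr (Or.inr ⟨ha1, hb1⟩)
        · exact Or.inr (Or.inl ⟨ha1, hb1⟩)
    · obtain ⟨hA, hB, hC⟩ := horient y x hy hx (Ne.symm heq)
      refine ⟨hA, hB, ?_⟩
      intro a b ha hb
      rw [hC a b ha hb]
      constructor
      · rintro (h | ⟨ha1, hb1⟩ | ⟨ha1, hb1⟩)
        · exact Or.inl h
        · exact Or.inr (Or.inr ⟨ha1, hb1⟩)
        · exact Or.inr (Or.inl ⟨ha1, hb1⟩)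
      · rintro (h | ⟨ha1, hb1⟩ | ⟨ha1, hb1⟩)
        · exact Or.inl h
        · exact Or.inr (Or.inr ⟨ha1, hb1⟩)
        · exact Or.inr (Or.inl ⟨ha1, hb1⟩)

lemma unionB_spec {par : Array Int} {x y : Int} (hG : pvGood par)
    (hx : PInR par.size x) (hy : PInR par.size y) :
    pvGood (unionB par x y) ∧ (unionB par x y).size = par.size ∧
    ∀ a b, PInR par.size a → PInR par.size b →
      (pvEqv (unionB par x y) a b ↔
        (pvEqv par a b ∨ (pvEqv par a x ∧ pvEqv par b y) ∨ (pvEqv par a y ∧ pvEqv par b x))) := by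
  have hrx : findB par par.size x = rootD par x := rfl
  have hry : findB par par.size y = rootD par y := rfl
  have hrootx := rootD_root hG hx
  have hrooty := rootD_root hG hy
  show pvGood (unionB par x y) ∧ _
  simp only [unionB, hrx, hry]
  by_cases heq : rootD par x = rootD par y
  · rw [if_neg (by simpa using heq)]
    refine ⟨hG, rfl, ?_⟩
    intro a b ha hb
    show rootD par a = rootD par b ↔ (rootD par a = rootD par b ∨
      (rootD par a = rootD par x ∧ rootD par b = rootD par y) ∨
      (rootD par a = rootD par y ∧ rootD par b = rootD par x))
    omega
  · rw [if_pos (by simpa using heq)]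
    obtain ⟨hG', hr'⟩ := set_root hG hrootx.2 hrooty.2 hrooty.1 heq
      (Or.inr hrootx.1)
    have hlen' : (pvASet par (rootD par x) (rootD par y)).size = par.size :=
      size_pvASet par _ _
    refine ⟨hG', hlen', ?_⟩
    have hred : ∀ c, PInR par.size c →
        rootD (pvASet par (rootD par x) (rootD par y)) c =
          if rootD par c = rootD par x then rootD par y else rootD par c := by
      intro c hc
      rw [hr' c hc, rootD_of_root hrootx.1]
    exact eqv_join hG hG' hlen' hx hy hred

-- ---------- the two edge relations and their bridge ----------

def relA (nums : List Int) (u v : Int) : Prop :=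
  ∃ p x, 2 ≤ p ∧ Prime p ∧ p ∣ x ∧ 2*p ≤ x ∧ x ∈ nums ∧ u = p - 1 ∧ v = x - 1

def relAb (nums : List Int) (t : Int) (u v : Int) : Prop :=
  ∃ p x, 2 ≤ p ∧ p < t ∧ Prime p ∧ p ∣ x ∧ 2*p ≤ x ∧ x ∈ nums ∧ u = p - 1 ∧ v = x - 1

def relB (nums : List Int) (u v : Int) : Prop :=
  ∃ x p, x ∈ nums ∧ 2 ≤ x ∧ 2 ≤ p ∧ Prime p ∧ p ∣ x ∧ u = x - 1 ∧ v = p - 1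

lemma dvd_lt_two_mul_le {p x : Int} (hp : 0 < p) (hx : 0 < x) (hd : p ∣ x) (hlt : p < x) :
    2*p ≤ x := by
  obtain ⟨c, hc⟩ := hd
  have hc1 : 1 ≤ c := by nlinarith
  have hc2 : 2 ≤ c := by
    by_contra h
    have : c = 1 := by omega
    rw [this, mul_one] at hc
    omega
  nlinarith

lemma prime_int_of_natPrime {p : Nat} (h : p.Prime) : Prime (p : Int) := by
  exact Nat.prime_iff_prime_int.mp h

lemma exists_prime_factor_lt {t : Int} (h2 : 2 ≤ t) (hnp : ¬ Prime t) :
    ∃ q, 2 ≤ q ∧ q < t ∧ Prime q ∧ q ∣ t := by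
  have ht : t = (t.toNat : Int) := by omega
  have h2n : 2 ≤ t.toNat := by omega
  have hnpn : ¬ t.toNat.Prime := by
    intro h
    apply hnp
    rw [ht]
    exact prime_int_of_natPrime h
  obtain ⟨q, hq, hqd⟩ := Nat.exists_prime_and_dvd (by omega : t.toNat ≠ 1)
  have hq2 : 2 ≤ q := hq.two_le
  have hqle : q ≤ t.toNat := Nat.le_of_dvd (by omega) hqd
  have hqlt : q < t.toNat := by
    rcases Nat.lt_or_ge q t.toNat with h | h
    · exact h
    · exfalso
      have : q = t.toNat := by omega
      rw [this] at hq
      exact hnpn hq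
  refine ⟨(q : Int), by omega, by omega, prime_int_of_natPrime hq, ?_⟩
  rw [ht]
  exact_mod_cast hqd

lemma prime_dvd_prime_eq {p d : Int} (hp : Prime p) (hd : Prime d) (h2p : 2 ≤ p) (h2d : 2 ≤ d)
    (h : p ∣ d) : p = d := by
  have hpn : p.natAbs.Prime := Int.prime_iff_natAbs_prime.mp hp
  have hdn : d.natAbs.Prime := Int.prime_iff_natAbs_prime.mp hd
  have hdvd : p.natAbs ∣ d.natAbs := Int.natAbs_dvd_natAbs.mpr h
  have := (Nat.prime_dvd_prime_iff_eq hpn hdn).mp hdvd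
  omega

lemma bridge_AtoB {nums : List Int} {u v : Int} (h : Relation.EqvGen (relA nums) u v) :
    Relation.EqvGen (relB nums) u v := by
  induction h with
  | rel a b hab =>
    obtain ⟨p, x, hp2, hpp, hpd, hpx, hxm, ha, hb⟩ := hab
    have hedge : relB nums (x-1) (p-1) := ⟨x, p, hxm, by omega, hp2, hpp, hpd, rfl, rfl⟩
    rw [ha, hb]
    exact Relation.EqvGen.symm _ _ (Relation.EqvGen.rel _ _ hedge)
  | refl a => exact Relation.EqvGen.refl _
  | symm a b _ ih => exact Relation.EqvGen.symm _ _ ih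
  | trans a b c _ _ ih1 ih2 => exact Relation.EqvGen.trans _ _ _ ih1 ih2

lemma bridge_BtoA {nums : List Int} {u v : Int} (h : Relation.EqvGen (relB nums) u v) :
    Relation.EqvGen (relA nums) u v := by
  induction h with
  | rel a b hab =>
    obtain ⟨x, p, hxm, hx2, hp2, hpp, hpd, ha, hb⟩ := hab
    rw [ha, hb]
    by_cases hpx : p = x
    · rw [hpx]
      exact Relation.EqvGen.refl _
    · have hple : p ≤ x := Int.le_of_dvd (by omega) hpd
      have hplt : p < x := by omega
      have h2p : 2*p ≤ x := dvd_lt_two_mul_le (by omega) (by omega) hpd hplt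
      have hedge : relA nums (p-1) (x-1) := ⟨p, x, hp2, hpp, hpd, h2p, hxm, rfl, rfl⟩
      exact Relation.EqvGen.symm _ _ (Relation.EqvGen.rel _ _ hedge)
  | refl a => exact Relation.EqvGen.refl _
  | symm a b _ ih => exact Relation.EqvGen.symm _ _ ih
  | trans a b c _ _ ih1 ih2 => exact Relation.EqvGen.trans _ _ _ ih1 ih2

lemma bridge {nums : List Int} (a b : Int) :
    Relation.EqvGen (relA nums) a b ↔ Relation.EqvGen (relB nums) a b :=
  ⟨bridge_AtoB, bridge_BtoA⟩

-- ---------- sieve characterization (port A) ----------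

def markOK (m t : Int) (isp : Array Bool) : Prop :=
  isp.size = (m+1).toNat ∧ ∀ j : Int, 0 ≤ j → j ≤ m →
    (pvAGet isp j true = true ↔ ¬ ∃ q, 2 ≤ q ∧ q < t ∧ Prime q ∧ q ∣ j ∧ 2*q ≤ j)

lemma markOK_init (m : Int) (hm : 0 ≤ m) :
    markOK m 2 (List.replicate (m+1).toNat true).toArray := by
  refine ⟨by simp, fun j hj0 hjm => ?_⟩
  have hlen : (((List.replicate (m+1).toNat true).toArray.size) : Int) = m + 1 := by simp; omega
  rw [pvAGet_eq_getElem _ _ true hj0 (by omega)]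
  rw [List.getElem_toArray, List.getElem_replicate]
  simp only [true_iff]
  rintro ⟨q, hq2, hqlt, _⟩
  omega

lemma prime_iff_nomark {t : Int} (h2 : 2 ≤ t) :
    (¬ ∃ q, 2 ≤ q ∧ q < t ∧ Prime q ∧ q ∣ t ∧ 2*q ≤ t) ↔ Prime t := by
  constructor
  · intro h
    by_contra hnp
    obtain ⟨q, hq2, hqlt, hqp, hqd⟩ := exists_prime_factor_lt h2 hnp
    exact h ⟨q, hq2, hqlt, hqp, hqd, dvd_lt_two_mul_le (by omega) (by omega) hqd hqlt⟩
  · intro hp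
    rintro ⟨q, hq2, hqlt, hqp, hqd, _⟩
    have hqn : q.natAbs.Prime := Int.prime_iff_natAbs_prime.mp hqp
    have htn : t.natAbs.Prime := Int.prime_iff_natAbs_prime.mp hp
    have hdvd : q.natAbs ∣ t.natAbs := Int.natAbs_dvd_natAbs.mpr hqd
    have := (Nat.prime_dvd_prime_iff_eq hqn htn).mp hdvd
    omega

lemma sieveInner_spec (nums : List Int) (m t : Int) (ht : 2 ≤ t) (htp : Prime t) (hm : 1 ≤ m) :
    ∀ (L : List Int) (isp : Array Bool) (uf : Array Int × Array Int) (R : Int → Int → Prop),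
      (∀ j ∈ L, t ∣ j ∧ 2*t ≤ j ∧ j ≤ m) →
      isp.size = (m+1).toNat → uf.1.size = m.toNat → pvInv uf.1 R →
      (L.foldl (sieveInnerA (PySem.Set.ofList nums) t) (isp, uf)).1.size = (m+1).toNat ∧
      (L.foldl (sieveInnerA (PySem.Set.ofList nums) t) (isp, uf)).2.1.size = m.toNat ∧
      (∀ j : Int, 0 ≤ j → j ≤ m →
        pvAGet (L.foldl (sieveInnerA (PySem.Set.ofList nums) t) (isp, uf)).1 j true =
          (if j ∈ L then false else pvAGet isp j true)) ∧
      pvInv (L.foldl (sieveInnerA (PySem.Set.ofList nums) t) (isp, uf)).2.1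
        (fun u v => R u v ∨ ∃ j, j ∈ L ∧ j ∈ nums ∧ u = t - 1 ∧ v = j - 1) := by
  intro L
  induction L with
  | nil =>
    intro isp uf R _ hisp hufl hInv
    refine ⟨hisp, hufl, fun j _ _ => by simp, ?_⟩
    exact pvInv_congr hInv (by simp)
  | cons j L ih =>
    intro isp uf R hmem hisp hufl hInv
    obtain ⟨htj, h2tj, hjm⟩ := hmem j (List.mem_cons_self)
    have hj4 : 4 ≤ j := by omega
    have hmcast : ((m.toNat : Int)) = m := by omega
    have hisplen : ((isp.size : Int)) = m + 1 := by rw [hisp]; omega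
    set isp' := pvASet isp j false with hisp'
    have hisp'len : isp'.size = (m+1).toNat := by
      rw [hisp', size_pvASet, hisp]
    have hisp'get : ∀ j' : Int, 0 ≤ j' → j' ≤ m →
        pvAGet isp' j' true = if j' = j then false else pvAGet isp j' true := by
      intro j' h0 h1
      exact pyGetD_set isp j j' false true (by omega) (by omega) h0 (by omega)
    have hstep : ∀ uf' : Array Int × Array Int,
        sieveInnerA (PySem.Set.ofList nums) t (isp, uf') j =
          (isp', if PySem.Set.contains (PySem.Set.ofList nums) j then
            unionSetA uf'.1 uf'.2 (t-1) (j-1) else uf') := by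
      intro uf'
      simp only [sieveInnerA]
      split_ifs <;> rfl
    by_cases hjn : j ∈ nums
    · have hcont : PySem.Set.contains (PySem.Set.ofList nums) j = true := by
        rw [PySem.Set.contains_iff, PySem.Set.mem_ofList]
        exact hjn
      have hInt : PInR uf.1.size (t-1) := by
        rw [hufl]
        constructor
        · omega
        · omega
      have hInj : PInR uf.1.size (j-1) := by
        rw [hufl]
        constructor
        · omega
        · omega
      obtain ⟨hGu, hlenu, hju⟩ := unionSetA_spec (rk := uf.2) hInv.1 hInt hInj
      have hInv' : pvInv (unionSetA uf.1 uf.2 (t-1) (j-1)).1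
          (fun u v => R u v ∨ (u = t - 1 ∧ v = j - 1)) :=
        pvInv_extend hInv hlenu hGu hInt hInj hju
      have hfold : (j :: L).foldl (sieveInnerA (PySem.Set.ofList nums) t) (isp, uf) =
          L.foldl (sieveInnerA (PySem.Set.ofList nums) t)
            (isp', unionSetA uf.1 uf.2 (t-1) (j-1)) := by
        show L.foldl _ (sieveInnerA (PySem.Set.ofList nums) t (isp, uf) j) = _
        rw [hstep uf, if_pos hcont]
      rw [hfold]
      obtain ⟨hA, hB, hC, hD⟩ := ih isp' (unionSetA uf.1 uf.2 (t-1) (j-1))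
        (fun u v => R u v ∨ (u = t - 1 ∧ v = j - 1))
        (fun w hw => hmem w (List.mem_cons_of_mem j hw)) hisp'len (by rw [hlenu, hufl]) hInv'
      refine ⟨hA, hB, ?_, ?_⟩
      · intro j' h0 h1
        rw [hC j' h0 h1, hisp'get j' h0 h1]
        by_cases hin : j' ∈ L
        · simp [hin]
        · by_cases hej : j' = j
          · simp [hin, hej]
          · simp [hin, hej]
      · refine pvInv_congr hD ?_
        intro u v
        constructor
        · rintro ((h | ⟨hu, hv⟩) | ⟨w, hw, hwn, hu, hv⟩)
          · exact Or.inl h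
          · exact Or.inr ⟨j, List.mem_cons_self, hjn, hu, hv⟩
          · exact Or.inr ⟨w, List.mem_cons_of_mem j hw, hwn, hu, hv⟩
        · rintro (h | ⟨w, hw, hwn, hu, hv⟩)
          · exact Or.inl (Or.inl h)
          · rw [List.mem_cons] at hw
            rcases hw with hw | hw
            · exact Or.inl (Or.inr ⟨hu, by rw [hv, hw]⟩)
            · exact Or.inr ⟨w, hw, hwn, hu, hv⟩
    · have hcont : ¬ PySem.Set.contains (PySem.Set.ofList nums) j = true := by
        rw [PySem.Set.contains_iff, PySem.Set.mem_ofList]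
        exact hjn
      have hfold : (j :: L).foldl (sieveInnerA (PySem.Set.ofList nums) t) (isp, uf) =
          L.foldl (sieveInnerA (PySem.Set.ofList nums) t) (isp', uf) := by
        show L.foldl _ (sieveInnerA (PySem.Set.ofList nums) t (isp, uf) j) = _
        rw [hstep uf, if_neg hcont]
      rw [hfold]
      obtain ⟨hA, hB, hC, hD⟩ := ih isp' uf R
        (fun w hw => hmem w (List.mem_cons_of_mem j hw)) hisp'len hufl hInv
      refine ⟨hA, hB, ?_, ?_⟩
      · intro j' h0 h1
        rw [hC j' h0 h1, hisp'get j' h0 h1]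
        by_cases hin : j' ∈ L
        · simp [hin]
        · by_cases hej : j' = j
          · simp [hin, hej]
          · simp [hin, hej]
      · refine pvInv_congr hD ?_
        intro u v
        constructor
        · rintro (h | ⟨w, hw, hwn, hu, hv⟩)
          · exact Or.inl h
          · exact Or.inr ⟨w, List.mem_cons_of_mem j hw, hwn, hu, hv⟩
        · rintro (h | ⟨w, hw, hwn, hu, hv⟩)
          · exact Or.inl h
          · rw [List.mem_cons] at hw
            rcases hw with hw | hw
            · exact absurd (hw ▸ hwn) hjn
            · exact Or.inr ⟨w, hw, hwn, hu, hv⟩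

def outerFA (lookup : PySem.Set Int) (st : Array Bool × (Array Int × Array Int)) (i : Int) :
    Array Bool × (Array Int × Array Int) :=
  if pvAGet st.1 i true = false then st
  else (PySem.List.pyRange (i+i) ((st.1.size : Int)) i).foldl (sieveInnerA lookup i) st

lemma sieveOuter_spec (nums : List Int) (m : Int) (hm : 1 ≤ m) (hmax : ∀ x ∈ nums, x ≤ m)
    (uf0 : Array Int × Array Int) (h0 : pvInv uf0.1 (fun _ _ => False)) (hl0 : uf0.1.size = m.toNat) :
    ∀ (k : Nat) (t : Int), t = 2 + (k : Int) → t ≤ m + 1 →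
      markOK m t ((PySem.List.pyRange 2 t 1).foldl (outerFA (PySem.Set.ofList nums))
        ((List.replicate (m+1).toNat true).toArray, uf0)).1 ∧
      ((PySem.List.pyRange 2 t 1).foldl (outerFA (PySem.Set.ofList nums))
        ((List.replicate (m+1).toNat true).toArray, uf0)).2.1.size = m.toNat ∧
      pvInv ((PySem.List.pyRange 2 t 1).foldl (outerFA (PySem.Set.ofList nums))
        ((List.replicate (m+1).toNat true).toArray, uf0)).2.1 (relAb nums t) := by
  intro k
  induction k with
  | zero =>
    intro t ht _
    have ht2 : t = 2 := by omega
    subst ht2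
    rw [PySem.List.pyRange_one_eq_nil (by omega)]
    refine ⟨markOK_init m (by omega), hl0, ?_⟩
    refine pvInv_congr h0 ?_
    intro u v
    simp only [false_iff, relAb]
    rintro ⟨p, x, hp2, hplt, _⟩
    omega
  | succ k ihk =>
    intro t' ht' htm'
    set t : Int := 2 + (k : Int) with htdef
    have ht'' : t' = t + 1 := by omega
    subst ht''
    have ht2 : 2 ≤ t := by omega
    have htm : t ≤ m := by omega
    obtain ⟨hmark, hlen, hInv⟩ := ihk t rfl (by omega)
    set st := (PySem.List.pyRange 2 t 1).foldl (outerFA (PySem.Set.ofList nums))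
      ((List.replicate (m+1).toNat true).toArray, uf0) with hst
    have hsplit : PySem.List.pyRange 2 (t+1) 1 = PySem.List.pyRange 2 t 1 ++ [t] :=
      PySem.List.pyRange_one_succ_right (by omega)
    rw [hsplit, List.foldl_append]
    show markOK m (t+1) (outerFA (PySem.Set.ofList nums) st t).1 ∧
      (outerFA (PySem.Set.ofList nums) st t).2.1.size = m.toNat ∧
      pvInv (outerFA (PySem.Set.ofList nums) st t).2.1 (relAb nums (t+1))
    have hmcast : ((m.toNat : Int)) = m := by omega
    have hlen1 : ((st.1.size : Int)) = m + 1 := by rw [hmark.1]; omega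
    have hread := hmark.2 t (by omega) htm
    by_cases hpt : Prime t
    · have htrue : pvAGet st.1 t true = true := by
        rw [hread, prime_iff_nomark ht2]
        exact hpt
      have houter : outerFA (PySem.Set.ofList nums) st t =
          (PySem.List.pyRange (t+t) (m+1) t).foldl (sieveInnerA (PySem.Set.ofList nums) t) st := by
        simp only [outerFA, htrue]
        have hsz : ((st.1.size : Int)) = m + 1 := by rw [hmark.1]; omega
        rw [hsz]
        simp
      rw [houter]
      have hmemL : ∀ j ∈ PySem.List.pyRange (t+t) (m+1) t, t ∣ j ∧ 2*t ≤ j ∧ j ≤ m := by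
        intro j hj
        rw [PySem.List.mem_pyRange_iff_of_pos (by omega) j] at hj
        obtain ⟨h1, h2, h3⟩ := hj
        refine ⟨?_, by omega, by omega⟩
        have : t ∣ (j - (t+t)) + (t + t) := dvd_add h3 ⟨2, by ring⟩
        simpa using this
      obtain ⟨hA, hB, hC, hD⟩ := sieveInner_spec nums m t ht2 hpt hm
        (PySem.List.pyRange (t+t) (m+1) t) st.1 st.2 (relAb nums t) hmemL hmark.1 hlen hInv
      refine ⟨⟨hA, ?_⟩, hB, ?_⟩
      · intro j hj0 hjm
        rw [hC j hj0 hjm]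
        by_cases hjL : j ∈ PySem.List.pyRange (t+t) (m+1) t
        · simp only [hjL, if_true]
          constructor
          · intro h; exact absurd h (by simp)
          · intro h
            exfalso
            obtain ⟨ht1, ht2', _⟩ := hmemL j hjL
            exact h ⟨t, by omega, by omega, hpt, ht1, by omega⟩
        · simp only [hjL, if_false]
          rw [hmark.2 j hj0 hjm]
          constructor
          · intro h
            rintro ⟨q, hq2, hqlt, hqp, hqd, hq2m⟩
            by_cases hqt : q = t
            · subst hqt
              apply hjL
              rw [PySem.List.mem_pyRange_iff_of_pos (by omega) j]
              refine ⟨by omega, by omega, ?_⟩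
              exact dvd_sub hqd ⟨2, by ring⟩
            · exact h ⟨q, hq2, by omega, hqp, hqd, hq2m⟩
          · intro h
            rintro ⟨q, hq2, hqlt, hqp, hqd, hq2m⟩
            exact h ⟨q, hq2, by omega, hqp, hqd, hq2m⟩
      · refine pvInv_congr hD ?_
        intro u v
        constructor
        · rintro (⟨p, x, hp2, hplt, hpp, hpd, hpx, hxm, hu, hv⟩ | ⟨j, hjL, hjn, hu, hv⟩)
          · exact ⟨p, x, hp2, by omega, hpp, hpd, hpx, hxm, hu, hv⟩
          · obtain ⟨ht1, ht2', ht3⟩ := hmemL j hjL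
            exact ⟨t, j, ht2, by omega, hpt, ht1, ht2', hjn, hu, hv⟩
        · rintro ⟨p, x, hp2, hplt, hpp, hpd, hpx, hxm, hu, hv⟩
          by_cases hptq : p = t
          · subst hptq
            refine Or.inr ⟨x, ?_, hxm, hu, hv⟩
            rw [PySem.List.mem_pyRange_iff_of_pos (by omega) x]
            refine ⟨by omega, by have := hmax x hxm; omega, ?_⟩
            exact dvd_sub hpd ⟨2, by ring⟩
          · exact Or.inl ⟨p, x, hp2, by omega, hpp, hpd, hpx, hxm, hu, hv⟩
    · have hfalse : pvAGet st.1 t true = false := by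
        have := hread
        rw [prime_iff_nomark ht2] at this
        rcases Bool.eq_false_or_eq_true (pvAGet st.1 t true) with h | h
        · exact absurd (this.mp h) hpt
        · exact h
      have houter : outerFA (PySem.Set.ofList nums) st t = st := by
        simp only [outerFA, hfalse, if_pos]
      rw [houter]
      refine ⟨⟨hmark.1, ?_⟩, hlen, ?_⟩
      · intro j hj0 hjm
        rw [hmark.2 j hj0 hjm]
        constructor
        · intro h
          rintro ⟨q, hq2, hqlt, hqp, hqd, hq2m⟩
          by_cases hqt : q = t
          · exact absurd (hqt ▸ hqp) hpt
          · exact h ⟨q, hq2, by omega, hqp, hqd, hq2m⟩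
        · intro h
          rintro ⟨q, hq2, hqlt, hqp, hqd, hq2m⟩
          exact h ⟨q, hq2, by omega, hqp, hqd, hq2m⟩
      · refine pvInv_congr hInv ?_
        intro u v
        constructor
        · rintro ⟨p, x, hp2, hplt, hpp, hpd, hpx, hxm, hu, hv⟩
          exact ⟨p, x, hp2, by omega, hpp, hpd, hpx, hxm, hu, hv⟩
        · rintro ⟨p, x, hp2, hplt, hpp, hpd, hpx, hxm, hu, hv⟩
          by_cases hptq : p = t
          · exact absurd (hptq ▸ hpp) hpt
          · exact ⟨p, x, hp2, by omega, hpp, hpd, hpx, hxm, hu, hv⟩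

lemma sieveA_spec (nums : List Int) (m : Int) (hm : 1 ≤ m) (hmax : ∀ x ∈ nums, x ≤ m)
    (uf0 : Array Int × Array Int) (h0 : pvInv uf0.1 (fun _ _ => False)) (hl0 : uf0.1.size = m.toNat) :
    (sieveA m (PySem.Set.ofList nums) uf0).1.size = m.toNat ∧
    pvInv (sieveA m (PySem.Set.ofList nums) uf0).1 (relA nums) := by
  by_cases hm2 : m < 2
  · have hsieve : sieveA m (PySem.Set.ofList nums) uf0 = uf0 := by
      simp only [sieveA, if_pos hm2]
    rw [hsieve]
    refine ⟨hl0, pvInv_congr h0 ?_⟩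
    intro u v
    simp only [false_iff, relA]
    rintro ⟨p, x, hp2, hpp, hpd, hpx, hxm, _⟩
    have := hmax x hxm
    omega
  · have hlen0 : (((List.replicate (m+1).toNat (true : Bool)).toArray.size) : Int) = m + 1 := by
      simp
      omega
    have hA : sieveA m (PySem.Set.ofList nums) uf0 =
        ((PySem.List.pyRange 2 (m+1) 1).foldl (outerFA (PySem.Set.ofList nums))
          ((List.replicate (m+1).toNat true).toArray, uf0)).2 := by
      simp only [sieveA, if_neg hm2]
      rw [hlen0]
      rfl
    obtain ⟨_, hlen, hInv⟩ := sieveOuter_spec nums m hm hmax uf0 h0 hl0 (m-1).toNat (m+1)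
      (by omega) (by omega)
    rw [hA]
    refine ⟨hlen, pvInv_congr hInv ?_⟩
    intro u v
    constructor
    · rintro ⟨p, x, hp2, hplt, hpp, hpd, hpx, hxm, hu, hv⟩
      exact ⟨p, x, hp2, hpp, hpd, hpx, hxm, hu, hv⟩
    · rintro ⟨p, x, hp2, hpp, hpd, hpx, hxm, hu, hv⟩
      have := hmax x hxm
      exact ⟨p, x, hp2, by omega, hpp, hpd, hpx, hxm, hu, hv⟩

-- ---------- trial-division characterization (port B) ----------

lemma divOutB_spec {d : Int} (hd : Prime d) (hd2 : 2 ≤ d) :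
    ∀ (fuel : Nat) (v : Int), 1 ≤ v → v.toNat ≤ fuel →
      1 ≤ divOutB d fuel v ∧ divOutB d fuel v ∣ v ∧ ¬ d ∣ divOutB d fuel v ∧
      (∀ p, Prime p → 2 ≤ p → p ≠ d → (p ∣ divOutB d fuel v ↔ p ∣ v)) := by
  intro fuel
  induction fuel with
  | zero => intro v hv hf; omega
  | succ fuel ih =>
    intro v hv hf
    by_cases hdv : d ∣ v
    · have hmod : PySem.Int.mod v d = 0 := (PySem.Int.mod_eq_zero_iff_dvd v d).mpr hdv
      have hunf : divOutB d (fuel+1) v = divOutB d fuel (PySem.Int.floordiv v d) := by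
        simp [divOutB, hmod]
      have hfd : PySem.Int.floordiv v d = v / d := PySem.Int.floordiv_eq_ediv_of_pos (by omega)
      have hvd : d * (v / d) = v := Int.mul_ediv_cancel' hdv
      have hv1 : 1 ≤ v / d := by nlinarith [Int.le_of_dvd (by omega) hdv]
      have hvlt : v / d < v := by nlinarith
      have hfu : (v / d).toNat ≤ fuel := by omega
      obtain ⟨h1, h2, h3, h4⟩ := ih (v / d) hv1 hfu
      rw [hunf, hfd]
      have hdd : v / d ∣ v := ⟨d, (Int.ediv_mul_cancel hdv).symm⟩
      refine ⟨h1, h2.trans hdd, h3, ?_⟩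
      intro p hp hp2 hpd
      rw [h4 p hp hp2 hpd]
      constructor
      · intro h
        exact h.trans hdd
      · intro h
        rw [← hvd] at h
        rcases hp.2.2 _ _ h with h' | h'
        · exact absurd (prime_dvd_prime_eq hp hd hp2 hd2 h') hpd
        · exact h'
    · have hmod : PySem.Int.mod v d ≠ 0 := by
        intro h
        exact hdv ((PySem.Int.mod_eq_zero_iff_dvd v d).mp h)
      have hunf : divOutB d (fuel+1) v = v := by
        simp [divOutB, hmod]
      rw [hunf]
      exact ⟨hv, dvd_refl v, hdv, fun p _ _ _ => Iff.rfl⟩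

lemma trialLoopB_spec {x : Int} (hx2 : 2 ≤ x) {n : Nat} (hxr : PInR n (x - 1)) :
    ∀ (fuel : Nat) (d v : Int) (par : Array Int) (R : Int → Int → Prop),
      par.size = n → 2 ≤ d → 1 ≤ v → v ∣ x →
      (∀ p, Prime p → 2 ≤ p → p ∣ v → d ≤ p) →
      (∀ p, Prime p → 2 ≤ p → p ∣ x → d ≤ p → p ∣ v) →
      (v - d).toNat + 1 ≤ fuel →
      pvInv par (fun u w => R u w ∨ ∃ p, 2 ≤ p ∧ p < d ∧ Prime p ∧ p ∣ x ∧ u = x - 1 ∧ w = p - 1) →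
      ∃ d', 2 ≤ d' ∧ (trialLoopB x fuel d v par).2.size = n ∧
        1 ≤ (trialLoopB x fuel d v par).1 ∧ (trialLoopB x fuel d v par).1 ∣ x ∧
        (trialLoopB x fuel d v par).1 < d' * d' ∧
        (∀ p, Prime p → 2 ≤ p → p ∣ (trialLoopB x fuel d v par).1 → d' ≤ p) ∧
        (∀ p, Prime p → 2 ≤ p → p ∣ x → d' ≤ p → p ∣ (trialLoopB x fuel d v par).1) ∧
        pvInv (trialLoopB x fuel d v par).2
          (fun u w => R u w ∨ ∃ p, 2 ≤ p ∧ p < d' ∧ Prime p ∧ p ∣ x ∧ u = x - 1 ∧ w = p - 1) := by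
  intro fuel
  induction fuel with
  | zero => intro d v par R _ _ _ _ _ _ hfuel _; omega
  | succ fuel ih =>
    intro d v par R hlen hd2 hv1 hvx hlow hhigh hfuel hInv
    by_cases hloop : d * d ≤ v
    · have hdltv : d < v := by nlinarith
      by_cases hdv : d ∣ v
      · -- d is prime: any prime factor of d divides v, hence is ≥ d
        have hdp : Prime d := by
          by_contra hnp
          obtain ⟨q, hq2, hqlt, hqp, hqd⟩ := exists_prime_factor_lt hd2 hnp
          have := hlow q hqp hq2 (hqd.trans hdv)
          omega
        have hmod : PySem.Int.mod v d = 0 := (PySem.Int.mod_eq_zero_iff_dvd v d).mpr hdv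
        have hunf : trialLoopB x (fuel+1) d v par =
            trialLoopB x fuel (d+1) (divOutB d v.toNat v) (unionB par (x-1) (d-1)) := by
          simp [trialLoopB, hloop, hmod]
        rw [hunf]
        have hdx : d ∣ x := hdv.trans hvx
        have hvlex : v ≤ x := Int.le_of_dvd (by omega) hvx
        have hdr : PInR n (d - 1) := by
          rcases hxr with ⟨hx0, hx1⟩
          have : d ≤ v := by omega
          exact ⟨by omega, by omega⟩
        have hxr' : PInR par.size (x - 1) := by rw [hlen]; exact hxr
        have hdr' : PInR par.size (d - 1) := by rw [hlen]; exact hdr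
        obtain ⟨hGu, hlenu, hju⟩ := unionB_spec hInv.1 hxr' hdr'
        have hInvU : pvInv (unionB par (x-1) (d-1))
            (fun u w => (R u w ∨ ∃ p, 2 ≤ p ∧ p < d ∧ Prime p ∧ p ∣ x ∧ u = x - 1 ∧ w = p - 1) ∨
              (u = x - 1 ∧ w = d - 1)) :=
          pvInv_extend hInv hlenu hGu hxr' hdr'
            (fun a b ha hb => hju a b ha hb)
        have hInvU' : pvInv (unionB par (x-1) (d-1))
            (fun u w => R u w ∨ ∃ p, 2 ≤ p ∧ p < d + 1 ∧ Prime p ∧ p ∣ x ∧ u = x - 1 ∧ w = p - 1) := by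
          refine pvInv_congr hInvU ?_
          intro u w
          constructor
          · rintro ((h | ⟨p, hp2, hplt, hpp, hpd, hu, hw⟩) | ⟨hu, hw⟩)
            · exact Or.inl h
            · exact Or.inr ⟨p, hp2, by omega, hpp, hpd, hu, hw⟩
            · exact Or.inr ⟨d, hd2, by omega, hdp, hdx, hu, hw⟩
          · rintro (h | ⟨p, hp2, hplt, hpp, hpd, hu, hw⟩)
            · exact Or.inl (Or.inl h)
            · by_cases hpe : p = d
              · exact Or.inr ⟨hu, by rw [hw, hpe]⟩
              · exact Or.inl (Or.inr ⟨p, hp2, by omega, hpp, hpd, hu, hw⟩)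
        obtain ⟨h1, h2, h3, h4⟩ := divOutB_spec hdp hd2 v.toNat v hv1 (le_refl _)
        set v' := divOutB d v.toNat v with hv'
        have hv'lev : v' ≤ v := Int.le_of_dvd (by omega) h2
        obtain ⟨d', hres⟩ := ih (d+1) v' (unionB par (x-1) (d-1)) R (by rw [hlenu]; exact hlen)
          (by omega) h1 (h2.trans hvx)
          (by
            intro p hpp hp2 hpv'
            have hpv : p ∣ v := (h4 p hpp hp2 ?_).mp hpv'
            · have := hlow p hpp hp2 hpv
              by_cases hpe : p = d
              · exact absurd (hpe ▸ hpv') h3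
              · omega
            · intro hpe
              exact h3 (hpe ▸ hpv'))
          (by
            intro p hpp hp2 hpx hdp1
            have hpv : p ∣ v := hhigh p hpp hp2 hpx (by omega)
            have hpe : p ≠ d := by omega
            exact (h4 p hpp hp2 hpe).mpr hpv)
          (by omega)
          hInvU'
        exact ⟨d', hres⟩
      · have hmod : PySem.Int.mod v d ≠ 0 := by
          intro h
          exact hdv ((PySem.Int.mod_eq_zero_iff_dvd v d).mp h)
        have hunf : trialLoopB x (fuel+1) d v par = trialLoopB x fuel (d+1) v par := by
          simp [trialLoopB, hloop, hmod]
        rw [hunf]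
        have hInv' : pvInv par
            (fun u w => R u w ∨ ∃ p, 2 ≤ p ∧ p < d + 1 ∧ Prime p ∧ p ∣ x ∧ u = x - 1 ∧ w = p - 1) := by
          refine pvInv_congr hInv ?_
          intro u w
          constructor
          · rintro (h | ⟨p, hp2, hplt, hpp, hpd, hu, hw⟩)
            · exact Or.inl h
            · exact Or.inr ⟨p, hp2, by omega, hpp, hpd, hu, hw⟩
          · rintro (h | ⟨p, hp2, hplt, hpp, hpd, hu, hw⟩)
            · exact Or.inl h
            · by_cases hpe : p = d
              · exfalso
                apply hdv
                rw [← hpe]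
                exact hhigh p hpp hp2 hpd (by omega)
              · exact Or.inr ⟨p, hp2, by omega, hpp, hpd, hu, hw⟩
        obtain ⟨d', hres⟩ := ih (d+1) v par R hlen (by omega) hv1 hvx
          (fun p hpp hp2 hpv => by
            have := hlow p hpp hp2 hpv
            by_cases hpe : p = d
            · exact absurd (hpe ▸ hpv) hdv
            · omega)
          (fun p hpp hp2 hpx hdp1 => hhigh p hpp hp2 hpx (by omega))
          (by omega)
          hInv'
        exact ⟨d', hres⟩
    · have hunf : trialLoopB x (fuel+1) d v par = (v, par) := by
        simp [trialLoopB, hloop]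
      rw [hunf]
      exact ⟨d, hd2, hlen, hv1, hvx, by simpa using (by omega : v < d * d), hlow, hhigh, hInv⟩

lemma factorB_spec {par : Array Int} {x : Int} {R : Int → Int → Prop}
    (hInv : pvInv par R) (hx2 : 2 ≤ x) (hxr : PInR par.size (x - 1)) :
    (factorB par x).size = par.size ∧
    pvInv (factorB par x) (fun u v => R u v ∨ ∃ p, 2 ≤ p ∧ Prime p ∧ p ∣ x ∧ u = x - 1 ∧ v = p - 1) := by
  have hInv0 : pvInv par (fun u w => R u w ∨ ∃ p, 2 ≤ p ∧ p < 2 ∧ Prime p ∧ p ∣ x ∧ u = x - 1 ∧ w = p - 1) := by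
    refine pvInv_congr hInv ?_
    intro u w
    constructor
    · intro h; exact Or.inl h
    · rintro (h | ⟨p, hp2, hplt, _⟩)
      · exact h
      · omega
  obtain ⟨d', hd'2, hlen', hw1, hwx, hwlt, hlow', hhigh', hInv'⟩ :=
    trialLoopB_spec hx2 hxr (x.toNat + 2) 2 x par R rfl (le_refl 2) (by omega) (dvd_refl x)
      (fun p _ hp2 _ => hp2) (fun p _ _ hpx _ => hpx) (by omega) hInv0
  set res := trialLoopB x (x.toNat + 2) 2 x par with hres
  by_cases hw : 1 < res.1
  · have hwp : Prime res.1 := by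
      by_contra hnp
      obtain ⟨q, hq2, hqlt, hqp, hqd⟩ := exists_prime_factor_lt (by omega) hnp
      have hdq : d' ≤ q := hlow' q hqp hq2 hqd
      obtain ⟨c, hc⟩ := hqd
      have hc2 : 2 ≤ c := by nlinarith
      have hcw : c ∣ res.1 := ⟨q, by rw [hc]; ring⟩
      by_cases hcp : Prime c
      · have : d' ≤ c := hlow' c hcp hc2 hcw
        nlinarith
      · obtain ⟨q2, hq22, hq2lt, hq2p, hq2d⟩ := exists_prime_factor_lt hc2 hcp
        have : d' ≤ q2 := hlow' q2 hq2p hq22 (hq2d.trans hcw)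
        have hq2c : q2 ≤ c := Int.le_of_dvd (by omega) hq2d
        nlinarith
    have hfact : factorB par x = unionB res.2 (x-1) (res.1-1) := by
      simp only [factorB, ← hres, if_pos hw]
    have hwr : PInR res.2.size (res.1 - 1) := by
      rw [hlen']
      rcases hxr with ⟨hx0, hx1⟩
      have : res.1 ≤ x := Int.le_of_dvd (by omega) hwx
      exact ⟨by omega, by omega⟩
    have hxr2 : PInR res.2.size (x - 1) := by rw [hlen']; exact hxr
    obtain ⟨hGu, hlenu, hju⟩ := unionB_spec hInv'.1 hxr2 hwr
    have hInvU := pvInv_extend hInv' hlenu hGu hxr2 hwr (fun a b ha hb => hju a b ha hb)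
    rw [hfact]
    refine ⟨by rw [hlenu, hlen'], ?_⟩
    refine pvInv_congr hInvU ?_
    intro u w
    constructor
    · rintro ((h | ⟨p, hp2, hplt, hpp, hpd, hu, hw'⟩) | ⟨hu, hw'⟩)
      · exact Or.inl h
      · exact Or.inr ⟨p, hp2, hpp, hpd, hu, hw'⟩
      · exact Or.inr ⟨res.1, by omega, hwp, hwx, hu, hw'⟩
    · rintro (h | ⟨p, hp2, hpp, hpd, hu, hw'⟩)
      · exact Or.inl (Or.inl h)
      · by_cases hplt : p < d'
        · exact Or.inl (Or.inr ⟨p, hp2, hplt, hpp, hpd, hu, hw'⟩)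
        · have hpw : p ∣ res.1 := hhigh' p hpp hp2 hpd (by omega)
          have : p = res.1 := prime_dvd_prime_eq hpp hwp hp2 (by omega) hpw
          exact Or.inr ⟨hu, by rw [hw', this]⟩
  · have hw1' : res.1 = 1 := by omega
    have hfact : factorB par x = res.2 := by
      simp only [factorB, ← hres, if_neg hw]
    rw [hfact]
    refine ⟨hlen', ?_⟩
    refine pvInv_congr hInv' ?_
    intro u w
    constructor
    · rintro (h | ⟨p, hp2, hplt, hpp, hpd, hu, hw'⟩)
      · exact Or.inl h
      · exact Or.inr ⟨p, hp2, hpp, hpd, hu, hw'⟩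
    · rintro (h | ⟨p, hp2, hpp, hpd, hu, hw'⟩)
      · exact Or.inl h
      · by_cases hplt : p < d'
        · exact Or.inr ⟨p, hp2, hplt, hpp, hpd, hu, hw'⟩
        · exfalso
          have hpw : p ∣ res.1 := hhigh' p hpp hp2 hpd (by omega)
          rw [hw1'] at hpw
          have := Int.le_of_dvd (by omega) hpw
          omega

lemma foldB_spec :
    ∀ (L : List Int) (par : Array Int) (R : Int → Int → Prop), pvInv par R →
      (∀ x ∈ L, x ≤ (par.size : Int)) →
      (L.foldl (fun par x => if x < 2 then par else factorB par x) par).size = par.size ∧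
      pvInv (L.foldl (fun par x => if x < 2 then par else factorB par x) par)
        (fun u v => R u v ∨ ∃ x, x ∈ L ∧ 2 ≤ x ∧ ∃ p, 2 ≤ p ∧ Prime p ∧ p ∣ x ∧ u = x - 1 ∧ v = p - 1) := by
  intro L
  induction L with
  | nil =>
    intro par R hInv _
    exact ⟨rfl, pvInv_congr hInv (by simp)⟩
  | cons x L ih =>
    intro par R hInv hmem
    have hxlt := hmem x (List.mem_cons_self)
    by_cases hx2 : x < 2
    · have hfold : (x :: L).foldl (fun par x => if x < 2 then par else factorB par x) par =
          L.foldl (fun par x => if x < 2 then par else factorB par x) par := by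
        show L.foldl _ (if x < 2 then par else factorB par x) = _
        rw [if_pos hx2]
      rw [hfold]
      obtain ⟨hA, hB⟩ := ih par R hInv (fun w hw => hmem w (List.mem_cons_of_mem x hw))
      refine ⟨hA, pvInv_congr hB ?_⟩
      intro u v
      constructor
      · rintro (h | ⟨w, hw, hw2, hrest⟩)
        · exact Or.inl h
        · exact Or.inr ⟨w, List.mem_cons_of_mem x hw, hw2, hrest⟩
      · rintro (h | ⟨w, hw, hw2, hrest⟩)
        · exact Or.inl h
        · rw [List.mem_cons] at hw
          rcases hw with hw | hw
          · omega
          · exact Or.inr ⟨w, hw, hw2, hrest⟩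
    · have hfold : (x :: L).foldl (fun par x => if x < 2 then par else factorB par x) par =
          L.foldl (fun par x => if x < 2 then par else factorB par x) (factorB par x) := by
        show L.foldl _ (if x < 2 then par else factorB par x) = _
        rw [if_neg hx2]
      rw [hfold]
      have hxr' : PInR par.size (x - 1) := ⟨by omega, by omega⟩
      obtain ⟨hA, hB⟩ := factorB_spec hInv (by omega) hxr' 
      obtain ⟨hC, hD⟩ := ih (factorB par x)
        (fun u v => R u v ∨ ∃ p, 2 ≤ p ∧ Prime p ∧ p ∣ x ∧ u = x - 1 ∧ v = p - 1) hB
        (fun w hw => by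
          have h2 := hmem w (List.mem_cons_of_mem x hw)
          rw [hA]; exact h2)
      refine ⟨by rw [hC, hA], pvInv_congr hD ?_⟩
      intro u v
      constructor
      · rintro ((h | ⟨p, hp2, hpp, hpd, hu, hv⟩) | ⟨w, hw, hw2, hrest⟩)
        · exact Or.inl h
        · exact Or.inr ⟨x, List.mem_cons_self, by omega, p, hp2, hpp, hpd, hu, hv⟩
        · exact Or.inr ⟨w, List.mem_cons_of_mem x hw, hw2, hrest⟩
      · rintro (h | ⟨w, hw, hw2, p, hp2, hpp, hpd, hu, hv⟩)
        · exact Or.inl (Or.inl h)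
        · rw [List.mem_cons] at hw
          rcases hw with hw | hw
          · exact Or.inl (Or.inr ⟨p, hp2, hpp, by rw [← hw]; exact hpd, by rw [hu, hw], hv⟩)
          · exact Or.inr ⟨w, hw, hw2, p, hp2, hpp, hpd, hu, hv⟩

-- ---------- the final checks ----------

lemma checkA_spec :
    ∀ (pairs : List (Int × Int)) (uf : Array Int × Array Int) (g : Int → Int), pvGood uf.1 →
      (∀ y, -(uf.1.size : Int) ≤ y → y < (uf.1.size : Int) → rootD uf.1 y = g y) →
      (∀ p ∈ pairs, (-(uf.1.size : Int) ≤ p.1 - 1 ∧ p.1 - 1 < (uf.1.size : Int)) ∧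
        (-(uf.1.size : Int) ≤ p.2 - 1 ∧ p.2 - 1 < (uf.1.size : Int))) →
      checkA uf pairs = pairs.all (fun p => decide (g (p.1 - 1) = g (p.2 - 1))) := by
  intro pairs
  induction pairs with
  | nil => intro uf g _ _ _; rfl
  | cons pr rest ih =>
    intro uf g hG hg hmem
    obtain ⟨⟨ha0, ha1⟩, ⟨hb0, hb1⟩⟩ := hmem pr (List.mem_cons_self)
    obtain ⟨hfa1, hGa, hlena, hra⟩ := findSetA_spec (x := pr.1 - 1) hG ha0 ha1
    set fa := findSetA uf.1 (pr.1 - 1) with hfa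
    obtain ⟨hfb1, hGb, hlenb, hrb⟩ := findSetA_spec (x := pr.2 - 1) hGa
      (by rw [hlena]; exact hb0) (by rw [hlena]; exact hb1)
    set fb := findSetA fa.2 (pr.2 - 1) with hfb
    -- rootD on fa.2 agrees with rootD on uf.1, also at wrapped indices
    have hraW : ∀ y, -(uf.1.size : Int) ≤ y → y < (uf.1.size : Int) →
        rootD fa.2 y = rootD uf.1 y := by
      intro y hy0 hy1
      by_cases hy : 0 ≤ y
      · exact hra y ⟨hy, hy1⟩
      · rw [rootD_wrap hGa (by rw [hlena]; omega) (by omega), hlena,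
          rootD_wrap hG (by omega) (by omega)]
        exact hra (y + uf.1.size) ⟨by omega, by omega⟩
    have hrbW : ∀ y, -(uf.1.size : Int) ≤ y → y < (uf.1.size : Int) →
        rootD fb.2 y = rootD uf.1 y := by
      intro y hy0 hy1
      by_cases hy : 0 ≤ y
      · rw [hrb y (by rw [hlena]; exact ⟨hy, hy1⟩)]
        exact hra y ⟨hy, hy1⟩
      · rw [rootD_wrap hGb (by rw [hlenb, hlena]; omega) (by omega), hlenb, hlena,
          rootD_wrap hG (by omega) (by omega)]
        rw [hrb (y + uf.1.size) (by rw [hlena]; exact ⟨by omega, by omega⟩)]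
        exact hra (y + uf.1.size) ⟨by omega, by omega⟩
    have hfb1' : fb.1 = rootD uf.1 (pr.2 - 1) := by
      rw [hfb1]
      exact hraW _ hb0 hb1
    have heq : (fa.1 = fb.1) ↔ (g (pr.1 - 1) = g (pr.2 - 1)) := by
      rw [hfa1, hfb1', hg _ ha0 ha1, hg _ hb0 hb1]
    have hunf : checkA uf (pr :: rest) =
        (if fa.1 = fb.1 then checkA (fb.2, uf.2) rest else false) := by
      simp only [checkA, ← hfa, ← hfb]
    rw [hunf, List.all_cons]
    by_cases hcase : fa.1 = fb.1
    · rw [if_pos hcase]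
      have hsz : fb.2.size = uf.1.size := by rw [hlenb, hlena]
      have hrec := ih (fb.2, uf.2) g hGb
        (fun y hy0 hy1 => by
          show rootD fb.2 y = g y
          rw [hrbW y (by rw [← hsz]; exact hy0) (by rw [← hsz]; exact hy1)]
          exact hg y (by rw [← hsz]; exact hy0) (by rw [← hsz]; exact hy1))
        (fun p hp => by
          obtain ⟨h1, h2⟩ := hmem p (List.mem_cons_of_mem pr hp)
          show ((-(fb.2.size : Int) ≤ p.1 - 1 ∧ p.1 - 1 < (fb.2.size : Int)) ∧ _)
          rw [hsz]
          exact ⟨h1, h2⟩)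
      rw [hrec]
      have : decide (g (pr.1 - 1) = g (pr.2 - 1)) = true := by
        simp only [decide_eq_true_eq]
        exact heq.mp hcase
      rw [this]
      simp
    · rw [if_neg hcase]
      have : decide (g (pr.1 - 1) = g (pr.2 - 1)) = false := by
        simp only [decide_eq_false_iff_not]
        intro h
        exact hcase (heq.mpr h)
      rw [this]
      simp

-- ===== VERDICT (by name: the statement is the Claim_ definition above) =====
-- the two ports compute the same Boolean: both test, pair by pair of zip(nums, sorted(nums)),
-- membership in the same component structure (EqvGen of the shared-prime-factor edges)
theorem gcdSort_spec : Claim_equal_gcdSort := by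
  intro nums _ hpre
  obtain ⟨hne, hpos⟩ := hpre
  show gcdSort nums = gcdSort_alt nums
  cases hmax : PySem.List.max? nums (fun v => v) with
  | none => exact absurd ((PySem.List.max?_eq_none_iff nums _).mp hmax) hne
  | some m =>
    have hmem : m ∈ nums := PySem.List.max?_mem hmax
    have hmaxx : ∀ x ∈ nums, x ≤ m := fun x hx => PySem.List.max?_isMax hmax x hx
    have hm1 : 1 ≤ m := by
      obtain ⟨b, hb, hble⟩ := hpos m hmem
      have := hmaxx b hb
      omega
    have hlow : ∀ a ∈ nums, 1 - m ≤ a := by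
      intro a ha
      obtain ⟨b, hb, hble⟩ := hpos a ha
      have := hmaxx b hb
      omega
    have hmcast : ((m.toNat : Int)) = m := by omega
    have hszr : (PySem.List.pyRange 0 m 1).toArray.size = m.toNat := by
      rw [List.size_toArray, PySem.List.length_pyRange_one]
      omega
    -- A side
    have h0A : pvInv ((PySem.List.pyRange 0 m 1).toArray,
        (List.replicate m.toNat (0:Int)).toArray).1 (fun _ _ => False) := init_inv m (by omega)
    obtain ⟨hlenA, hInvA⟩ := sieveA_spec nums m hm1 hmaxx
      ((PySem.List.pyRange 0 m 1).toArray, (List.replicate m.toNat (0:Int)).toArray) h0A hszr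
    set ufA := sieveA m (PySem.Set.ofList nums)
      ((PySem.List.pyRange 0 m 1).toArray, (List.replicate m.toNat (0:Int)).toArray) with hufA
    set pairs := nums.zip (PySem.List.sorted nums (fun v => v) false) with hpairs
    have hmemp : ∀ p ∈ pairs, p.1 ∈ nums ∧ p.2 ∈ nums := by
      intro p hp
      have := List.of_mem_zip (show (p.1, p.2) ∈ _ from hp)
      exact ⟨this.1, (PySem.List.mem_sorted nums _ _ _).mp this.2⟩
    have hbnd : ∀ x ∈ nums, -(m : Int) ≤ x - 1 ∧ x - 1 < m := by
      intro x hx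
      have := hlow x hx
      have := hmaxx x hx
      omega
    have hinrA : ∀ p ∈ pairs,
        (-(ufA.1.size : Int) ≤ p.1 - 1 ∧ p.1 - 1 < (ufA.1.size : Int)) ∧
        (-(ufA.1.size : Int) ≤ p.2 - 1 ∧ p.2 - 1 < (ufA.1.size : Int)) := by
      intro p hp
      obtain ⟨h1, h2⟩ := hmemp p hp
      obtain ⟨h3, h4⟩ := hbnd _ h1
      obtain ⟨h5, h6⟩ := hbnd _ h2
      rw [hlenA]
      exact ⟨⟨by omega, by omega⟩, ⟨by omega, by omega⟩⟩
    have hA : gcdSort nums = pairs.all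
        (fun p => decide (rootD ufA.1 (p.1 - 1) = rootD ufA.1 (p.2 - 1))) := by
      have := checkA_spec pairs ufA (fun y => rootD ufA.1 y) hInvA.1
        (fun y _ _ => rfl) hinrA
      simp only [gcdSort, hmax]
      exact this
    -- B side
    have h0B : pvInv (PySem.List.pyRange 0 m 1).toArray (fun _ _ => False) :=
      init_inv m (by omega)
    obtain ⟨hlenB, hInvB0⟩ := foldB_spec (PySem.Set.ofList nums)
      (PySem.List.pyRange 0 m 1).toArray (fun _ _ => False) h0B
      (by
        intro x hx
        have hxn : x ∈ nums := (PySem.Set.mem_ofList _ _).mp hx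
        have := hmaxx _ hxn
        rw [hszr]
        omega)
    set parB := (PySem.Set.ofList nums).foldl (fun par x => if x < 2 then par else factorB par x)
      (PySem.List.pyRange 0 m 1).toArray with hparB
    have hInvB : pvInv parB (relB nums) := by
      refine pvInv_congr hInvB0 ?_
      intro u v
      constructor
      · rintro (h | ⟨x, hx, hx2, p, hp2, hpp, hpd, hu, hv⟩)
        · exact h.elim
        · exact ⟨x, p, (PySem.Set.mem_ofList _ _).mp hx, hx2, hp2, hpp, hpd, hu, hv⟩
      · rintro ⟨x, p, hx, hx2, hp2, hpp, hpd, hu, hv⟩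
        exact Or.inr ⟨x, (PySem.Set.mem_ofList _ _).mpr hx, hx2, p, hp2, hpp, hpd, hu, hv⟩
    have hlenB' : parB.size = m.toNat := by rw [hlenB, hszr]
    have hB : gcdSort_alt nums = pairs.all
        (fun p => findB parB parB.size (p.1 - 1) == findB parB parB.size (p.2 - 1)) := by
      simp only [gcdSort_alt, hmax]
      rfl
    -- pointwise: both tests decide the same equivalence
    have hkey : ∀ q : Int, -(m : Int) ≤ q → q < m →
        ∃ q', 0 ≤ q' ∧ q' < m ∧ rootD ufA.1 q = rootD ufA.1 q' ∧ rootD parB q = rootD parB q' := by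
      intro q h0 h1
      by_cases hq : 0 ≤ q
      · exact ⟨q, hq, h1, rfl, rfl⟩
      · refine ⟨q + m, by omega, by omega, ?_, ?_⟩
        · rw [rootD_wrap hInvA.1 (by rw [hlenA]; omega) (by omega), hlenA, hmcast]
        · rw [rootD_wrap hInvB.1 (by rw [hlenB']; omega) (by omega), hlenB', hmcast]
    rw [hA, hB]
    apply Bool.eq_iff_iff.mpr
    simp only [List.all_eq_true]
    have hpoint : ∀ p ∈ pairs,
        ((rootD ufA.1 (p.1 - 1) = rootD ufA.1 (p.2 - 1)) ↔
          (rootD parB (p.1 - 1) = rootD parB (p.2 - 1))) := by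
      intro p hp
      obtain ⟨h1, h2⟩ := hmemp p hp
      obtain ⟨h3, h4⟩ := hbnd _ h1
      obtain ⟨h5, h6⟩ := hbnd _ h2
      obtain ⟨q1, hq10, hq11, hqa1, hqb1⟩ := hkey (p.1 - 1) h3 h4
      obtain ⟨q2, hq20, hq21, hqa2, hqb2⟩ := hkey (p.2 - 1) h5 h6
      have hqr1 : PInR ufA.1.size q1 := by rw [hlenA]; exact ⟨hq10, by omega⟩
      have hqr2 : PInR ufA.1.size q2 := by rw [hlenA]; exact ⟨hq20, by omega⟩
      have hqs1 : PInR parB.size q1 := by rw [hlenB']; exact ⟨hq10, by omega⟩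
      have hqs2 : PInR parB.size q2 := by rw [hlenB']; exact ⟨hq20, by omega⟩
      rw [hqa1, hqa2, hqb1, hqb2]
      calc (rootD ufA.1 q1 = rootD ufA.1 q2)
          ↔ Relation.EqvGen (relA nums) q1 q2 := hInvA.2 q1 q2 hqr1 hqr2
        _ ↔ Relation.EqvGen (relB nums) q1 q2 := bridge q1 q2
        _ ↔ (rootD parB q1 = rootD parB q2) := (hInvB.2 q1 q2 hqs1 hqs2).symm
    constructor
    · intro h p hp
      have := h p hp
      rw [decide_eq_true_eq] at this
      show (findB parB parB.size (p.1 - 1) == findB parB parB.size (p.2 - 1)) = true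
      rw [show (findB parB parB.size (p.1 - 1) == findB parB parB.size (p.2 - 1)) =
        decide (rootD parB (p.1 - 1) = rootD parB (p.2 - 1)) from rfl, decide_eq_true_eq]
      exact (hpoint p hp).mp this
    · intro h p hp
      have := h p hp
      rw [show (findB parB parB.size (p.1 - 1) == findB parB parB.size (p.2 - 1)) =
        decide (rootD parB (p.1 - 1) = rootD parB (p.2 - 1)) from rfl, decide_eq_true_eq] at this
      rw [decide_eq_true_eq]
      exact (hpoint p hp).mpr this
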